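-- pv_equiv track=rewrite | github.com/sharma-anubhav/CrackingTheCodingInterview-DSA | ch36(Graphs)/Grids/6. MultiSource/6.2.py | wag
-- ===== SOURCE A (Python) =====
-- from collections import deque
--
-- def get_nbr(node):
--     cur_r, cur_c = node[0], node[1]
--     directions = [(1,0), (0,1), (-1,0), (0,-1)]
--     for direction in directions:
--         yield (cur_r+direction[0], cur_c+direction[1])
--
-- def is_valid(graph, loc):
--     cur_r, cur_c = loc[0], loc[1]
--     r, c = len(graph), len(graph[0])
--     if 0<=cur_r<r and 0<=cur_c<c and graph[cur_r][cur_c]!=-1: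
--         return True
--     return False
--
-- def get_gates(grid):
--     gates = []
--     r, c = len(grid), len(grid[0])
--     for ri in range(r):
--         for ci in range(c):
--             if grid[ri][ci] == 0:
--                 gates.append((ri, ci))
--     return gates
--
-- def wag(grid):
--     gates = get_gates(grid)
--     visited = set()
--     q = deque()
--
--     for gate in gates:
--         visited.add(gate)
--         q.append((gate, 0))
--
--     while q:
--         node, d2g = q.popleft()
--         for nbr in get_nbr(node):
--             if is_valid(grid, nbr) and nbr not in visited:
--                 grid[nbr[0]][nbr[1]] = d2g+1
--                 visited.add(nbr)
--                 q.append((nbr,d2g+1))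
--     return grid
-- ===== SOURCE B (Python) =====
-- def wag(grid):
--     rows, cols = len(grid), len(grid[0])
--     # grass-fire / dynamic-programming dilation: no queue, no frontier, no visited set;
--     # each unassigned cell pulls its distance from a neighbour of the previous level.
--     dist = [[0 if grid[r][c] == 0 else None for c in range(cols)] for r in range(rows)]
--     d = 0
--     while True:
--         changed = False
--         for r in range(rows):
--             for c in range(cols):
--                 if dist[r][c] is None and grid[r][c] != -1 and any(
--                         0 <= nr < rows and 0 <= nc < cols and dist[nr][nc] == d
--                         for nr, nc in ((r + 1, c), (r, c + 1), (r - 1, c), (r, c - 1))):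
--                     dist[r][c] = d + 1
--                     changed = True
--         if not changed:
--             break
--         d += 1
--     for r in range(rows):
--         for c in range(cols):
--             if dist[r][c] is not None:
--                 grid[r][c] = dist[r][c]
--     return grid
-- ===== Notes on version B (the rewrite author's own statement) =====
-- stated objective: alternative
-- what changed: Replaces the multi-source BFS (deque of (cell,dist) pairs with a visited set expanding outward from gates) by a grass-fire dynamic-programming dilation: a separate dist table, repeated full-grid raster sweeps in which each still-unassigned non-wall cell pulls d+1 when some neighbour already holds d, iterated to a fixpoint, then one pass writing the table back into the grid; there is no queue, no frontier and no visited set.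
import Mathlib
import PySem

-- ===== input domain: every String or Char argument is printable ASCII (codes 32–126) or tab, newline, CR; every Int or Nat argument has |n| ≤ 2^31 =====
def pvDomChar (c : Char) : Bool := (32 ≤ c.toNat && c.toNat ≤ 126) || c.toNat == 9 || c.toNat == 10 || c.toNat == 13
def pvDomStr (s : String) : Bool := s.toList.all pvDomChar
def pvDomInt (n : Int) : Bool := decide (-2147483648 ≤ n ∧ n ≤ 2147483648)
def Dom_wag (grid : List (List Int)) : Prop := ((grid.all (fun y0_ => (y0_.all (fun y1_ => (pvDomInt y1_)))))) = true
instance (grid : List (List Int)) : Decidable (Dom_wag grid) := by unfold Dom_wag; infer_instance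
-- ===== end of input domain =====

-- B replaces A's multi-source BFS (deque + visited set) by a grass-fire DP dilation: a separate
-- dist table filled by repeated full-grid sweeps to a fixpoint, then written back. Both Pythons
-- mutate `grid` in place to the same final content; the equivalence proved is about the return value.

-- ===== PORT A =====

-- helper get_nbr(node): the four neighbours in A's direction order
def pyNbrs (node : Int × Int) : List (Int × Int) :=
  [(node.1 + 1, node.2), (node.1, node.2 + 1), (node.1 - 1, node.2), (node.1, node.2 - 1)]

-- grid[i][j] (all reads are guarded in range under Pre_, so the defaults are never read)
def cellAt (g : List (List Int)) (i j : Int) : Int :=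
  PySem.List.pyGetD (PySem.List.pyGetD g i []) j 0

-- grid[i][j] = v
def setCell (g : List (List Int)) (i j v : Int) : List (List Int) :=
  PySem.List.pySetD g i (PySem.List.pySetD (PySem.List.pyGetD g i []) j v)

-- helper is_valid(graph, loc)
def isValid (graph : List (List Int)) (loc : Int × Int) : Bool :=
  decide (0 ≤ loc.1) && decide (loc.1 < PySem.List.len graph) &&
  decide (0 ≤ loc.2) && decide (loc.2 < PySem.List.len (PySem.List.pyGetD graph 0 [])) &&
  (cellAt graph loc.1 loc.2 != -1)

-- helper get_gates(grid)
def getGates (grid : List (List Int)) : List (Int × Int) :=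
  (PySem.List.pyRange 0 (PySem.List.len grid) 1).foldl (fun gates ri =>
    (PySem.List.pyRange 0 (PySem.List.len (PySem.List.pyGetD grid 0 [])) 1).foldl (fun gates ci =>
      if cellAt grid ri ci = 0 then gates ++ [(ri, ci)] else gates) gates) []

-- body of A's while-iteration: the for-loop over get_nbr(node), appending to the deque
def stepA (d : Int)
    (s : List (List Int) × PySem.Set (Int × Int) × List ((Int × Int) × Int)) (nbr : Int × Int) :
    List (List Int) × PySem.Set (Int × Int) × List ((Int × Int) × Int) :=
  if isValid s.1 nbr && !(PySem.Set.contains s.2.1 nbr) then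
    (setCell s.1 nbr.1 nbr.2 (d + 1), PySem.Set.add s.2.1 nbr, s.2.2 ++ [(nbr, d + 1)])
  else s

-- A's while loop (fuel only makes the recursion total; it provably never runs out)
def wagLoopA : Nat → List (List Int) → PySem.Set (Int × Int) → List ((Int × Int) × Int) →
    List (List Int)
  | 0, g, _, _ => g
  | _ + 1, g, _, [] => g
  | fuel + 1, g, vis, (node, d) :: qs =>
      let s := (pyNbrs node).foldl (stepA d) (g, vis, qs)
      wagLoopA fuel s.1 s.2.1 s.2.2

def wag (grid : List (List Int)) : List (List Int) :=
  let gates := getGates grid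
  let vis : PySem.Set (Int × Int) := PySem.Set.ofList gates
  let q : List ((Int × Int) × Int) := gates.map (fun gate => (gate, 0))
  wagLoopA (grid.length * (PySem.List.pyGetD grid 0 []).length + gates.length + 1) grid vis q

-- ===== PORT B =====

-- dist[r][c] (read of the separate distance table; None = not yet assigned)
def dAt (D : List (List (Option Int))) (r c : Int) : Option Int :=
  PySem.List.pyGetD (PySem.List.pyGetD D r []) c none

-- dist[r][c] = v
def setD (D : List (List (Option Int))) (r c : Int) (v : Option Int) :
    List (List (Option Int)) :=
  PySem.List.pySetD D r (PySem.List.pySetD (PySem.List.pyGetD D r []) c v)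

-- the comprehension building dist: 0 at gates, None elsewhere
def initDist (grid : List (List Int)) (rows cols : Int) : List (List (Option Int)) :=
  (PySem.List.pyRange 0 rows 1).map (fun r =>
    (PySem.List.pyRange 0 cols 1).map (fun c =>
      if cellAt grid r c = 0 then some (0 : Int) else none))

-- Source B's pull condition for cell (r,c) at level d (reads the original grid and the dist table)
def pullTry (grid : List (List Int)) (rows cols d : Int) (D : List (List (Option Int)))
    (r c : Int) : Bool :=
  (dAt D r c == none) && (cellAt grid r c != -1) &&
  ([(r + 1, c), (r, c + 1), (r - 1, c), (r, c - 1)].any (fun nb =>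
    decide (0 ≤ nb.1) && decide (nb.1 < rows) && decide (0 ≤ nb.2) && decide (nb.2 < cols) &&
    (dAt D nb.1 nb.2 == some d)))

-- one full raster sweep: assigns d+1 where the pull condition holds; snd = `changed`
def sweep (grid : List (List Int)) (rows cols d : Int) (D0 : List (List (Option Int))) :
    List (List (Option Int)) × Bool :=
  (PySem.List.pyRange 0 rows 1).foldl (fun s r =>
    (PySem.List.pyRange 0 cols 1).foldl (fun s c =>
      if pullTry grid rows cols d s.1 r c then (setD s.1 r c (some (d + 1)), true) else s) s)
    (D0, false)

-- Source B's `while True` loop (fuel only makes it total; one unit per sweep)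
def pullLoop (grid : List (List Int)) (rows cols : Int) :
    Nat → List (List (Option Int)) → Int → List (List (Option Int))
  | 0, D, _ => D
  | fuel + 1, D, d =>
      let s := sweep grid rows cols d D
      if s.2 then pullLoop grid rows cols fuel s.1 (d + 1) else s.1

-- the final write-back pass
def writeBack (grid : List (List Int)) (rows cols : Int) (D : List (List (Option Int))) :
    List (List Int) :=
  (PySem.List.pyRange 0 rows 1).foldl (fun g r =>
    (PySem.List.pyRange 0 cols 1).foldl (fun g c =>
      match dAt D r c with
      | some v => setCell g r c v
      | none => g) g) grid

def wag_alt (grid : List (List Int)) : List (List Int) :=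
  let rows : Int := PySem.List.len grid
  let cols : Int := PySem.List.len (PySem.List.pyGetD grid 0 [])
  writeBack grid rows cols
    (pullLoop grid rows cols (grid.length * (PySem.List.pyGetD grid 0 []).length + 2)
      (initDist grid rows cols) 0)

-- ===== PRECONDITION & SPEC =====
-- Pre_ excludes exactly the inputs where A raises IndexError: the empty grid (len(grid[0]))
-- and grids in which some row is shorter than the first row (get_gates / is_valid index it).
def Pre_wag (grid : List (List Int)) : Prop :=
  grid ≠ [] ∧ ∀ row ∈ grid, (PySem.List.pyGetD grid 0 []).length ≤ row.length
instance (grid : List (List Int)) : Decidable (Pre_wag grid) := by unfold Pre_wag; infer_instance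

def pvWitness_wag : List (List Int) := [[0, -1], [3, 4]]

def Spec_wag (grid : List (List Int)) (out : List (List Int)) : Prop := out = wag_alt grid
instance (grid : List (List Int)) (out : List (List Int)) : Decidable (Spec_wag grid out) := by
  unfold Spec_wag; infer_instance

-- ===== CLAIM (what is proved, stated in full; the proofs are below) =====
def Claim_equal_wag : Prop :=
  ∀ (grid : List (List Int)), Dom_wag grid → Pre_wag grid → Spec_wag grid (wag grid)

-- ===== LEMMAS AND PROOFS =====

-- ---- proof-side model: the level-synchronous BFS the two ports are bridged through ----

def wagInit (grid : List (List Int)) (rows cols : Int) :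
    List (Int × Int) × PySem.Set (Int × Int) :=
  (PySem.List.pyRange 0 rows 1).foldl (fun s r =>
    (PySem.List.pyRange 0 cols 1).foldl (fun s c =>
      if cellAt grid r c = 0 then (s.1 ++ [(r, c)], PySem.Set.add s.2 (r, c)) else s) s)
    ([], PySem.Set.empty)

def stepB (rows cols d : Int)
    (s : List (List Int) × PySem.Set (Int × Int) × List (Int × Int)) (cell : Int × Int) :
    List (List Int) × PySem.Set (Int × Int) × List (Int × Int) :=
  [(cell.1 + 1, cell.2), (cell.1, cell.2 + 1), (cell.1 - 1, cell.2), (cell.1, cell.2 - 1)].foldl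
    (fun s nb =>
      if decide (0 ≤ nb.1) && decide (nb.1 < rows) && decide (0 ≤ nb.2) && decide (nb.2 < cols) &&
          (cellAt s.1 nb.1 nb.2 != -1) && !(PySem.Set.contains s.2.1 nb) then
        (setCell s.1 nb.1 nb.2 (d + 1), PySem.Set.add s.2.1 nb, s.2.2 ++ [nb])
      else s) s

def wagLoopB (rows cols : Int) : Nat → List (List Int) → PySem.Set (Int × Int) →
    List (Int × Int) → Int → List (List Int)
  | 0, g, _, _, _ => g
  | _ + 1, g, _, [], _ => g
  | fuel + 1, g, vis, frontier, d =>
      let s := frontier.foldl (stepB rows cols d) (g, vis, [])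
      wagLoopB rows cols fuel s.1 s.2.1 s.2.2 (d + 1)

def wagLevel (grid : List (List Int)) : List (List Int) :=
  let rows : Int := PySem.List.len grid
  let cols : Int := PySem.List.len (PySem.List.pyGetD grid 0 [])
  let init := wagInit grid rows cols
  wagLoopB rows cols (grid.length * (PySem.List.pyGetD grid 0 []).length + 2) grid init.2 init.1 0

-- ---- stage 1: wag = wagLevel (unconditional) ----

def dimsOK (R C : Int) (g : List (List Int)) : Prop :=
  PySem.List.len g = R ∧ PySem.List.len (PySem.List.pyGetD g 0 []) = C

def allCells (R C : Int) : List (Int × Int) :=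
  PySem.List.pyRange 0 R 1 ×ˢ PySem.List.pyRange 0 C 1

def cnt (R C : Int) (vis : PySem.Set (Int × Int)) : Nat :=
  ((allCells R C).filter (fun p => !(PySem.Set.contains vis p))).length

def stepN (R C d : Int)
    (s : List (List Int) × PySem.Set (Int × Int) × List (Int × Int)) (nb : Int × Int) :
    List (List Int) × PySem.Set (Int × Int) × List (Int × Int) :=
  if decide (0 ≤ nb.1) && decide (nb.1 < R) && decide (0 ≤ nb.2) && decide (nb.2 < C) &&
      (cellAt s.1 nb.1 nb.2 != -1) && !(PySem.Set.contains s.2.1 nb) then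
    (setCell s.1 nb.1 nb.2 (d + 1), PySem.Set.add s.2.1 nb, s.2.2 ++ [nb])
  else s

lemma stepB_eq (R C d : Int) (s : List (List Int) × PySem.Set (Int × Int) × List (Int × Int))
    (cell : Int × Int) : stepB R C d s cell = (pyNbrs cell).foldl (stepN R C d) s := rfl

lemma loopA_nil (f : Nat) (g : List (List Int)) (vis : PySem.Set (Int × Int)) :
    wagLoopA f g vis [] = g := by cases f <;> rfl

lemma mem_allCells (R C : Int) (p : Int × Int) :
    p ∈ allCells R C ↔ (0 ≤ p.1 ∧ p.1 < R ∧ 0 ≤ p.2 ∧ p.2 < C) := by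
  unfold allCells
  cases p
  simp [List.mem_product, PySem.List.mem_pyRange_one]
  tauto

lemma nodup_allCells (R C : Int) : (allCells R C).Nodup :=
  List.Nodup.product (PySem.List.nodup_pyRange_one _ _) (PySem.List.nodup_pyRange_one _ _)

lemma length_allCells (R C : Int) : (allCells R C).length = R.toNat * C.toNat := by
  unfold allCells
  simp [List.length_product, PySem.List.length_pyRange_one]

lemma cnt_le (R C : Int) (vis : PySem.Set (Int × Int)) : cnt R C vis ≤ R.toNat * C.toNat := by
  unfold cnt
  rw [← length_allCells R C]
  exact List.length_filter_le _ _

lemma cnt_add (R C : Int) (vis : PySem.Set (Int × Int)) (p : Int × Int)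
    (hb : p ∈ allCells R C) (hf : PySem.Set.contains vis p = false) :
    cnt R C (PySem.Set.add vis p) + 1 = cnt R C vis := by
  have hn := nodup_allCells R C
  have hp : p ∉ vis := by
    intro h
    rw [(PySem.Set.contains_iff (s := vis) (x := p)).mpr h] at hf
    cases hf
  unfold cnt
  rw [PySem.Set.add_of_not_mem hp]
  have h1 : ((allCells R C).filter (fun q => !(PySem.Set.contains (vis ++ [p]) q)))
      = ((allCells R C).filter (fun q => !(PySem.Set.contains vis q))).filter (fun q => !(q == p)) := by
    rw [List.filter_filter]
    apply List.filter_congr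
    intro q _
    simp [PySem.Set.contains_eq_listContains, Bool.beq_eq_decide_eq, Bool.and_comm]
  have hn2 : ((allCells R C).filter (fun q => !(PySem.Set.contains vis q))).Nodup := hn.filter _
  have hmem : p ∈ (allCells R C).filter (fun q => !(PySem.Set.contains vis q)) := by
    simp [List.mem_filter, hb, hp]
  have h2 : ((allCells R C).filter (fun q => !(PySem.Set.contains vis q))).filter (fun q => !(q == p))
      = ((allCells R C).filter (fun q => !(PySem.Set.contains vis q))).erase p := by
    rw [hn2.erase_eq_filter p]
    apply List.filter_congr; intro q _; simp [bne]
  have h3 : 0 < ((allCells R C).filter (fun q => !(PySem.Set.contains vis q))).length :=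
    List.length_pos_of_mem hmem
  rw [h1, h2, List.length_erase_of_mem hmem]
  omega

lemma setCell_dims {R C : Int} {g : List (List Int)} (hd : dimsOK R C g)
    {i : Int} (h0 : 0 ≤ i) (j v : Int) : dimsOK R C (setCell g i j v) := by
  obtain ⟨hr, hc⟩ := hd
  unfold dimsOK setCell
  rw [PySem.List.pySetD_of_nonneg _ _ h0]
  constructor
  · simpa using hr
  · rw [← hc]
    rcases Nat.eq_zero_or_pos i.toNat with hz | hpos
    · have hi : i = 0 := by omega
      subst hi
      cases g with
      | nil => simp
      | cons r rs => simp [PySem.List.pyGetD_zero, PySem.List.length_pySetD]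
    · cases g with
      | nil => simp
      | cons r rs =>
        have hset : (r :: rs).set i.toNat (PySem.List.pySetD (PySem.List.pyGetD (r :: rs) i []) j v)
            = r :: rs.set (i.toNat - 1) (PySem.List.pySetD (PySem.List.pyGetD (r :: rs) i []) j v) := by
          cases h : i.toNat with
          | zero => omega
          | succ n => simp [List.set]
        rw [hset]
        simp [PySem.List.pyGetD_zero]

lemma accA (d : Int) : ∀ (nbrs : List (Int × Int)) (g : List (List Int))
    (vis : PySem.Set (Int × Int)) (q : List ((Int × Int) × Int)),
    nbrs.foldl (stepA d) (g, vis, q)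
      = ((nbrs.foldl (stepA d) (g, vis, [])).1, (nbrs.foldl (stepA d) (g, vis, [])).2.1,
         q ++ (nbrs.foldl (stepA d) (g, vis, [])).2.2) := by
  intro nbrs
  induction nbrs with
  | nil => intro g vis q; simp
  | cons nb rest ih =>
    intro g vis q
    simp only [List.foldl_cons, stepA]
    by_cases h : (isValid g nb && !(PySem.Set.contains vis nb)) = true
    · simp only [h, if_true, List.nil_append]
      rw [ih _ _ (q ++ [(nb, d + 1)]), ih _ _ ([(nb, d + 1)])]
      simp
    · simp only [Bool.not_eq_true] at h
      simp only [h, Bool.false_eq_true, if_false]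
      exact ih g vis q

lemma accN (R C d : Int) : ∀ (nbrs : List (Int × Int)) (g : List (List Int))
    (vis : PySem.Set (Int × Int)) (q : List (Int × Int)),
    nbrs.foldl (stepN R C d) (g, vis, q)
      = ((nbrs.foldl (stepN R C d) (g, vis, [])).1, (nbrs.foldl (stepN R C d) (g, vis, [])).2.1,
         q ++ (nbrs.foldl (stepN R C d) (g, vis, [])).2.2) := by
  intro nbrs
  induction nbrs with
  | nil => intro g vis q; simp
  | cons nb rest ih =>
    intro g vis q
    simp only [List.foldl_cons, stepN]
    by_cases h : (decide (0 ≤ nb.1) && decide (nb.1 < R) && decide (0 ≤ nb.2) && decide (nb.2 < C) &&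
        (cellAt g nb.1 nb.2 != -1) && !(PySem.Set.contains vis nb)) = true
    · simp only [h, if_true, List.nil_append]
      rw [ih _ _ (q ++ [nb]), ih _ _ ([nb])]
      simp
    · simp only [Bool.not_eq_true] at h
      simp only [h, Bool.false_eq_true, if_false]
      exact ih g vis q

lemma nodeLem {R C : Int} (d : Int) : ∀ (nbrs : List (Int × Int)) (g : List (List Int))
    (vis : PySem.Set (Int × Int)), dimsOK R C g →
    (nbrs.foldl (stepA d) (g, vis, ([] : List ((Int × Int) × Int)))
       = ((nbrs.foldl (stepN R C d) (g, vis, [])).1,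
          (nbrs.foldl (stepN R C d) (g, vis, [])).2.1,
          ((nbrs.foldl (stepN R C d) (g, vis, [])).2.2).map (fun p => (p, d + 1))))
    ∧ dimsOK R C (nbrs.foldl (stepN R C d) (g, vis, [])).1
    ∧ ((nbrs.foldl (stepN R C d) (g, vis, [])).2.2).length
        + cnt R C (nbrs.foldl (stepN R C d) (g, vis, [])).2.1 = cnt R C vis := by
  intro nbrs
  induction nbrs with
  | nil =>
    intro g vis hd
    exact ⟨rfl, hd, by simp⟩
  | cons nb rest ih =>
    intro g vis hd
    obtain ⟨hr, hc⟩ := hd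
    have hcond : (isValid g nb && !(PySem.Set.contains vis nb))
        = (decide (0 ≤ nb.1) && decide (nb.1 < R) && decide (0 ≤ nb.2) && decide (nb.2 < C) &&
           (cellAt g nb.1 nb.2 != -1) && !(PySem.Set.contains vis nb)) := by
      unfold isValid
      rw [hr, hc]
    simp only [List.foldl_cons, stepA, stepN]
    rw [hcond]
    by_cases h : (decide (0 ≤ nb.1) && decide (nb.1 < R) && decide (0 ≤ nb.2) && decide (nb.2 < C) &&
        (cellAt g nb.1 nb.2 != -1) && !(PySem.Set.contains vis nb)) = true
    · have hparts := h
      simp only [Bool.and_eq_true, decide_eq_true_eq, Bool.not_eq_true'] at hparts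
      obtain ⟨⟨⟨⟨⟨h1, h2⟩, h3⟩, h4⟩, h5⟩, h6⟩ := hparts
      have hdims' : dimsOK R C (setCell g nb.1 nb.2 (d + 1)) :=
        setCell_dims ⟨hr, hc⟩ h1 nb.2 (d + 1)
      have hcnt : cnt R C (PySem.Set.add vis nb) + 1 = cnt R C vis :=
        cnt_add R C vis nb ((mem_allCells R C nb).mpr ⟨h1, h2, h3, h4⟩) h6
      simp only [h, if_true, List.nil_append]
      rw [accA d rest _ _ [(nb, d + 1)], accN R C d rest _ _ [nb]]
      obtain ⟨e1, e2, e3⟩ := ih (setCell g nb.1 nb.2 (d + 1)) (PySem.Set.add vis nb) hdims'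
      refine ⟨?_, e2, ?_⟩
      · rw [e1]
        simp
      · simp only [List.length_append, List.length_cons, List.length_nil]
        omega
    · simp only [Bool.not_eq_true] at h
      simp only [h, Bool.false_eq_true, if_false]
      exact ih g vis ⟨hr, hc⟩

lemma amono {R C : Int} : ∀ (f1 f2 : Nat) (g : List (List Int)) (vis : PySem.Set (Int × Int))
    (q : List ((Int × Int) × Int)), dimsOK R C g →
    q.length + cnt R C vis ≤ f1 → q.length + cnt R C vis ≤ f2 →
    wagLoopA f1 g vis q = wagLoopA f2 g vis q := by
  intro f1
  induction f1 with
  | zero =>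
    intro f2 g vis q hd h1 h2
    have hq : q = [] := by
      cases q with
      | nil => rfl
      | cons x xs => simp at h1
    subst hq
    rw [loopA_nil, loopA_nil]
  | succ a ih =>
    intro f2 g vis q hd h1 h2
    cases q with
    | nil => rw [loopA_nil, loopA_nil]
    | cons nd qs =>
      obtain ⟨node, dd⟩ := nd
      cases f2 with
      | zero => simp at h2
      | succ b =>
        simp only [wagLoopA]
        rw [accA dd (pyNbrs node) g vis qs]
        obtain ⟨e1, e2, e3⟩ := nodeLem (R := R) (C := C) dd (pyNbrs node) g vis hd
        rw [e1]
        simp only [List.length_cons] at h1 h2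
        apply ih b _ _ _ e2 ?_ ?_
        · simp only [List.length_append, List.length_map]
          omega
        · simp only [List.length_append, List.length_map]
          omega

lemma levelInv {R C : Int} (d : Int) : ∀ (frontier : List (Int × Int)) (g : List (List Int))
    (vis : PySem.Set (Int × Int)) (n : List (Int × Int)), dimsOK R C g →
    dimsOK R C (frontier.foldl (stepB R C d) (g, vis, n)).1
    ∧ ((frontier.foldl (stepB R C d) (g, vis, n)).2.2).length
        + cnt R C (frontier.foldl (stepB R C d) (g, vis, n)).2.1 = n.length + cnt R C vis := by
  intro frontier
  induction frontier with
  | nil =>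
    intro g vis n hd
    exact ⟨hd, rfl⟩
  | cons cell fr ih =>
    intro g vis n hd
    simp only [List.foldl_cons, stepB_eq]
    rw [accN R C d (pyNbrs cell) g vis n]
    obtain ⟨e1, e2, e3⟩ := nodeLem (R := R) (C := C) d (pyNbrs cell) g vis hd
    obtain ⟨i1, i2⟩ := ih ((pyNbrs cell).foldl (stepN R C d) (g, vis, [])).1
      ((pyNbrs cell).foldl (stepN R C d) (g, vis, [])).2.1
      (n ++ ((pyNbrs cell).foldl (stepN R C d) (g, vis, [])).2.2) e2
    refine ⟨i1, ?_⟩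
    rw [i2]
    simp only [List.length_append]
    omega

lemma flush {R C : Int} (d : Int) : ∀ (frontier : List (Int × Int)) (g : List (List Int))
    (vis : PySem.Set (Int × Int)) (n : List (Int × Int)) (fa : Nat), dimsOK R C g →
    (frontier.length + n.length) + cnt R C vis ≤ fa →
    wagLoopA fa g vis (frontier.map (fun p => (p, d)) ++ n.map (fun p => (p, d + 1)))
      = wagLoopA fa (frontier.foldl (stepB R C d) (g, vis, n)).1
          (frontier.foldl (stepB R C d) (g, vis, n)).2.1
          (((frontier.foldl (stepB R C d) (g, vis, n)).2.2).map (fun p => (p, d + 1))) := by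
  intro frontier
  induction frontier with
  | nil =>
    intro g vis n fa hd hb
    simp
  | cons cell fr ih =>
    intro g vis n fa hd hb
    simp only [List.length_cons] at hb
    cases fa with
    | zero => omega
    | succ a =>
      obtain ⟨e1, e2, e3⟩ := nodeLem (R := R) (C := C) d (pyNbrs cell) g vis hd
      simp only [List.map_cons, List.cons_append, wagLoopA]
      rw [accA d (pyNbrs cell) g vis (fr.map (fun p => (p, d)) ++ n.map (fun p => (p, d + 1)))]
      rw [e1]
      have hq : (fr.map (fun p => (p, d)) ++ n.map (fun p => (p, d + 1)))
            ++ (((pyNbrs cell).foldl (stepN R C d) (g, vis, [])).2.2).map (fun p => (p, d + 1))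
          = fr.map (fun p => (p, d))
            ++ ((n ++ ((pyNbrs cell).foldl (stepN R C d) (g, vis, [])).2.2).map (fun p => (p, d + 1))) := by
        simp
      rw [hq]
      rw [amono (R := R) (C := C) a (a + 1) _ _ _ e2 ?_ ?_]
      · rw [ih ((pyNbrs cell).foldl (stepN R C d) (g, vis, [])).1
            ((pyNbrs cell).foldl (stepN R C d) (g, vis, [])).2.1
            (n ++ ((pyNbrs cell).foldl (stepN R C d) (g, vis, [])).2.2) (a + 1) e2 ?_]
        · simp only [List.foldl_cons, stepB_eq]
          rw [accN R C d (pyNbrs cell) g vis n]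
        · simp only [List.length_append]
          omega
      · simp only [List.length_append, List.length_map]
        omega
      · simp only [List.length_append, List.length_map]
        omega

lemma outerEq {R C : Int} : ∀ (fb : Nat) (frontier : List (Int × Int)) (g : List (List Int))
    (vis : PySem.Set (Int × Int)) (d : Int) (fa : Nat), dimsOK R C g →
    frontier.length + cnt R C vis ≤ fa → cnt R C vis + 2 ≤ fb →
    wagLoopA fa g vis (frontier.map (fun p => (p, d))) = wagLoopB R C fb g vis frontier d := by
  intro fb
  induction fb with
  | zero => intro frontier g vis d fa hd hfa hfb; omega
  | succ b ih =>
    intro frontier g vis d fa hd hfa hfb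
    cases frontier with
    | nil => rw [List.map_nil, loopA_nil]; rfl
    | cons cell fr =>
      simp only [wagLoopB]
      have hsplit : (cell :: fr).map (fun p => (p, d))
          = (cell :: fr).map (fun p => (p, d)) ++ ([] : List (Int × Int)).map (fun p => (p, d + 1)) := by
        simp
      rw [hsplit, flush d (cell :: fr) g vis [] fa hd (by simpa using hfa)]
      obtain ⟨l1, l2⟩ := levelInv (R := R) (C := C) d (cell :: fr) g vis [] hd
      simp only [List.length_nil, Nat.zero_add] at l2
      cases hro : ((cell :: fr).foldl (stepB R C d) (g, vis, ([] : List (Int × Int)))).2.2 with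
      | nil =>
        rw [hro] at l2
        rw [List.map_nil, loopA_nil]
        cases b with
        | zero => simp at l2; omega
        | succ b' => rfl
      | cons y ys =>
        rw [hro] at l2
        apply ih (y :: ys) _ _ (d + 1) fa l1 ?_ ?_
        · simp only [List.length_cons] at hfa l2 ⊢
          omega
        · simp only [List.length_cons] at l2
          omega

lemma initInner (grid : List (List Int)) (ri : Int) : ∀ (cs : List Int) (acc : List (Int × Int)),
    cs.foldl (fun s c => if cellAt grid ri c = 0 then (s.1 ++ [(ri, c)], PySem.Set.add s.2 (ri, c)) else s)
        (acc, PySem.Set.ofList acc)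
      = (cs.foldl (fun l c => if cellAt grid ri c = 0 then l ++ [(ri, c)] else l) acc,
         PySem.Set.ofList (cs.foldl (fun l c => if cellAt grid ri c = 0 then l ++ [(ri, c)] else l) acc)) := by
  intro cs
  induction cs with
  | nil => intro acc; rfl
  | cons c rest ih =>
    intro acc
    simp only [List.foldl_cons]
    by_cases h : cellAt grid ri c = 0
    · simp only [h, if_pos]
      rw [show PySem.Set.add (PySem.Set.ofList acc) (ri, c)
            = PySem.Set.ofList (acc ++ [(ri, c)]) from
          (PySem.Set.ofList_append_singleton acc (ri, c)).symm]
      exact ih (acc ++ [(ri, c)])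
    · simp only [if_neg h]
      exact ih acc

lemma initOuter (grid : List (List Int)) (cols : Int) : ∀ (rs : List Int) (acc : List (Int × Int)),
    rs.foldl (fun s r =>
        (PySem.List.pyRange 0 cols 1).foldl (fun s c =>
          if cellAt grid r c = 0 then (s.1 ++ [(r, c)], PySem.Set.add s.2 (r, c)) else s) s)
        (acc, PySem.Set.ofList acc)
      = (rs.foldl (fun l r =>
           (PySem.List.pyRange 0 cols 1).foldl (fun l c =>
             if cellAt grid r c = 0 then l ++ [(r, c)] else l) l) acc,
         PySem.Set.ofList (rs.foldl (fun l r =>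
           (PySem.List.pyRange 0 cols 1).foldl (fun l c =>
             if cellAt grid r c = 0 then l ++ [(r, c)] else l) l) acc)) := by
  intro rs
  induction rs with
  | nil => intro acc; rfl
  | cons r rest ih =>
    intro acc
    simp only [List.foldl_cons]
    rw [initInner grid r (PySem.List.pyRange 0 cols 1) acc]
    exact ih _

lemma initEq (grid : List (List Int)) :
    wagInit grid (PySem.List.len grid) (PySem.List.len (PySem.List.pyGetD grid 0 []))
      = (getGates grid, PySem.Set.ofList (getGates grid)) := by
  unfold wagInit getGates
  have h0 : (([] : List (Int × Int)), (PySem.Set.empty : PySem.Set (Int × Int)))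
      = (([] : List (Int × Int)), PySem.Set.ofList []) := rfl
  rw [h0, initOuter grid (PySem.List.len (PySem.List.pyGetD grid 0 []))
    (PySem.List.pyRange 0 (PySem.List.len grid) 1) []]

lemma wag_eq_level (grid : List (List Int)) : wag grid = wagLevel grid := by
  have hR : (PySem.List.len grid).toNat = grid.length := by
    simp [PySem.List.len_eq]
  have hC : (PySem.List.len (PySem.List.pyGetD grid 0 [])).toNat
      = (PySem.List.pyGetD grid 0 []).length := by
    simp [PySem.List.len_eq]
  have hcnt := cnt_le (PySem.List.len grid) (PySem.List.len (PySem.List.pyGetD grid 0 []))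
    (PySem.Set.ofList (getGates grid))
  rw [hR, hC] at hcnt
  simp only [wag, wagLevel]
  rw [initEq grid]
  exact outerEq (R := PySem.List.len grid) (C := PySem.List.len (PySem.List.pyGetD grid 0 []))
    (grid.length * (PySem.List.pyGetD grid 0 []).length + 2) (getGates grid) grid
    (PySem.Set.ofList (getGates grid)) 0
    (grid.length * (PySem.List.pyGetD grid 0 []).length + (getGates grid).length + 1)
    ⟨rfl, rfl⟩ (by omega) (by omega)

-- ---- stage 2: wagLevel = wag_alt (under Pre_) ----

-- in-bounds predicate and dist-table dimensions
def Inb (R C : Int) (p : Int × Int) : Prop := 0 ≤ p.1 ∧ p.1 < R ∧ 0 ≤ p.2 ∧ p.2 < C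

def DimsD (R C : Int) (D : List (List (Option Int))) : Prop :=
  D.length = R.toNat ∧ ∀ row ∈ D, row.length = C.toNat

-- the overlay of a dist table onto the grid (the value writeBack produces, cell-wise)
def ovRow (row : List Int) (drow : List (Option Int)) : List Int :=
  (List.zipWith (fun o dv => dv.getD o) row drow) ++ row.drop drow.length

def ov (grid : List (List Int)) (D : List (List (Option Int))) : List (List Int) :=
  List.zipWith ovRow grid D ++ grid.drop D.length


lemma pyGetD_nonneg {α : Type} (xs : List α) (i : Int) (h : 0 ≤ i) (d : α) :
    PySem.List.pyGetD xs i d = xs.getD i.toNat d := by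
  have hcast := PySem.List.pyGetD_natCast (xs := xs) (n := i.toNat) (d := d)
  rw [Int.toNat_of_nonneg h] at hcast
  exact hcast

lemma getD_set {α : Type} (l : List α) (i j : Nat) (a d : α) :
    (l.set i a).getD j d = if j = i ∧ i < l.length then a else l.getD j d := by
  simp only [List.getD_eq_getElem?_getD, List.getElem?_set]
  by_cases hj : i = j
  · subst hj
    by_cases hi : i < l.length <;> simp [hi]
  · have hj' : ¬ (j = i ∧ i < l.length) := by
      intro h; exact hj h.1.symm
    simp [hj, hj']

lemma dAt_nonneg (D : List (List (Option Int))) (r c : Int) (hr : 0 ≤ r) (hc : 0 ≤ c) :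
    dAt D r c = (D.getD r.toNat []).getD c.toNat none := by
  unfold dAt
  rw [pyGetD_nonneg _ _ hr, pyGetD_nonneg _ _ hc]

lemma cellAt_nonneg (g : List (List Int)) (r c : Int) (hr : 0 ≤ r) (hc : 0 ≤ c) :
    cellAt g r c = (g.getD r.toNat []).getD c.toNat 0 := by
  unfold cellAt
  rw [pyGetD_nonneg _ _ hr, pyGetD_nonneg _ _ hc]

lemma setD_nonneg (D : List (List (Option Int))) (r c : Int) (hr : 0 ≤ r) (hc : 0 ≤ c)
    (v : Option Int) :
    setD D r c v = D.set r.toNat ((D.getD r.toNat []).set c.toNat v) := by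
  unfold setD
  rw [pyGetD_nonneg _ _ hr, PySem.List.pySetD_of_nonneg _ _ hc, PySem.List.pySetD_of_nonneg _ _ hr]

lemma setCell_nonneg (g : List (List Int)) (r c : Int) (hr : 0 ≤ r) (hc : 0 ≤ c) (v : Int) :
    setCell g r c v = g.set r.toNat ((g.getD r.toNat []).set c.toNat v) := by
  unfold setCell
  rw [pyGetD_nonneg _ _ hr, PySem.List.pySetD_of_nonneg _ _ hc, PySem.List.pySetD_of_nonneg _ _ hr]

lemma dims_setD {R C : Int} {D : List (List (Option Int))} (hD : DimsD R C D)
    {r c : Int} (hp : Inb R C (r, c)) (v : Option Int) : DimsD R C (setD D r c v) := by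
  obtain ⟨h1, h2, h3, h4⟩ := hp
  obtain ⟨hl, hrow⟩ := hD
  rw [setD_nonneg _ _ _ h1 h3]
  refine ⟨by simpa using hl, ?_⟩
  intro row hrow'
  rcases List.mem_or_eq_of_mem_set hrow' with hin | heq
  · exact hrow row hin
  · subst heq
    have hrn : r.toNat < D.length := by omega
    rw [List.getD_eq_getElem _ _ hrn, List.length_set]
    exact hrow _ (List.getElem_mem hrn)

lemma dAt_setD_self {R C : Int} {D : List (List (Option Int))} (hD : DimsD R C D)
    {r c : Int} (hp : Inb R C (r, c)) (v : Option Int) : dAt (setD D r c v) r c = v := by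
  obtain ⟨h1, h2, h3, h4⟩ := hp
  obtain ⟨hl, hrow⟩ := hD
  have hrn : r.toNat < D.length := by omega
  have hcn : c.toNat < (D.getD r.toNat []).length := by
    rw [List.getD_eq_getElem _ _ hrn, hrow _ (List.getElem_mem hrn)]
    omega
  rw [setD_nonneg _ _ _ h1 h3, dAt_nonneg _ _ _ h1 h3, getD_set]
  rw [if_pos ⟨rfl, hrn⟩, getD_set, if_pos ⟨rfl, hcn⟩]

lemma dAt_setD_ne {R C : Int} {D : List (List (Option Int))} (hD : DimsD R C D)
    {r c : Int} (hp : Inb R C (r, c)) (v : Option Int) (r' c' : Int)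
    (hr' : 0 ≤ r') (hc' : 0 ≤ c') (hne : (r', c') ≠ (r, c)) :
    dAt (setD D r c v) r' c' = dAt D r' c' := by
  obtain ⟨h1, h2, h3, h4⟩ := hp
  obtain ⟨hl, hrow⟩ := hD
  have hrn : r.toNat < D.length := by omega
  rw [setD_nonneg _ _ _ h1 h3, dAt_nonneg _ _ _ hr' hc', dAt_nonneg _ _ _ hr' hc', getD_set]
  by_cases hrr : r'.toNat = r.toNat
  · have hr'r : r' = r := by omega
    have hcc : c' ≠ c := fun hc => hne (by rw [hr'r, hc])
    have hccn : ¬ (c'.toNat = c.toNat ∧ c.toNat < (D.getD r.toNat []).length) := by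
      intro h; exact hcc (by omega)
    rw [if_pos ⟨hrr, hrn⟩, getD_set, if_neg hccn, hrr]
  · rw [if_neg (by intro h; exact hrr h.1)]

lemma ovRow_length (row : List Int) (drow : List (Option Int)) :
    (ovRow row drow).length = row.length := by
  unfold ovRow
  simp only [List.length_append, List.length_zipWith, List.length_drop]
  omega

lemma ov_length (grid : List (List Int)) (D : List (List (Option Int))) :
    (ov grid D).length = grid.length := by
  unfold ov
  simp only [List.length_append, List.length_zipWith, List.length_drop]
  omega

lemma ovRow_getElem (row : List Int) (drow : List (Option Int)) (j : Nat)
    (hj : j < row.length) (hle : drow.length ≤ row.length) :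
    (ovRow row drow)[j]'(by rw [ovRow_length]; exact hj)
      = if h : j < drow.length then (drow[j]).getD (row[j]) else row[j] := by
  unfold ovRow
  have hz : (List.zipWith (fun o dv => dv.getD o) row drow).length = drow.length := by
    simp only [List.length_zipWith]
    omega
  by_cases h : j < drow.length
  · rw [List.getElem_append_left (by omega)]
    simp [List.getElem_zipWith, h]
  · rw [List.getElem_append_right (by omega)]
    simp only [hz, List.getElem_drop, dif_neg h]
    congr 1
    omega

lemma ov_getElem (grid : List (List Int)) (D : List (List (Option Int)))
    (hlen : D.length ≤ grid.length) (i : Nat) (hi : i < grid.length) :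
    (ov grid D)[i]'(by rw [ov_length]; exact hi)
      = if h : i < D.length then ovRow (grid[i]) (D[i]) else grid[i] := by
  unfold ov
  have hz : (List.zipWith ovRow grid D).length = D.length := by
    simp only [List.length_zipWith]
    omega
  by_cases h : i < D.length
  · rw [List.getElem_append_left (by omega)]
    simp [List.getElem_zipWith, h]
  · rw [List.getElem_append_right (by omega)]
    simp only [hz, List.getElem_drop, dif_neg h]
    congr 1
    omega

lemma ov_row (grid : List (List Int)) (D : List (List (Option Int)))
    (hlen : D.length = grid.length) (i : Nat) (hi : i < grid.length) :
    (ov grid D).getD i [] = ovRow (grid[i]) (D[i]'(by omega)) := by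
  rw [List.getD_eq_getElem (ov grid D) [] (by rw [ov_length]; exact hi),
      ov_getElem grid D (by omega) i hi, dif_pos (by omega)]

lemma ovRow_getD (row : List Int) (drow : List (Option Int)) (j : Nat)
    (hj : j < row.length) (hle : drow.length ≤ row.length) :
    (ovRow row drow).getD j 0
      = if j < drow.length then (drow.getD j none).getD (row.getD j 0) else row.getD j 0 := by
  rw [List.getD_eq_getElem (ovRow row drow) 0 (by rw [ovRow_length]; exact hj),
      ovRow_getElem row drow j hj hle]
  by_cases h : j < drow.length
  · rw [dif_pos h, if_pos h, List.getD_eq_getElem drow none h, List.getD_eq_getElem row 0 hj]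
  · rw [dif_neg h, if_neg h, List.getD_eq_getElem row 0 hj]

lemma cellAt_ov {grid : List (List Int)} {R C : Int} {D : List (List (Option Int))}
    (hRg : R.toNat = grid.length) (hCg : ∀ row ∈ grid, C.toNat ≤ row.length)
    (hD : DimsD R C D) {r c : Int} (hp : Inb R C (r, c)) :
    cellAt (ov grid D) r c
      = match dAt D r c with
        | some v => v
        | none => cellAt grid r c := by
  obtain ⟨h1, h2, h3, h4⟩ := hp
  obtain ⟨hl, hrow⟩ := hD
  have hrn : r.toNat < grid.length := by omega
  have hrD : r.toNat < D.length := by omega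
  have hrlen : C.toNat ≤ (grid[r.toNat]).length := hCg _ (List.getElem_mem hrn)
  have hdlen : (D[r.toNat]).length = C.toNat := hrow _ (List.getElem_mem hrD)
  have hcn : c.toNat < C.toNat := by omega
  rw [cellAt_nonneg _ _ _ h1 h3, dAt_nonneg _ _ _ h1 h3, cellAt_nonneg _ _ _ h1 h3,
      ov_row grid D (by omega) r.toNat hrn,
      ovRow_getD (grid[r.toNat]) (D[r.toNat]) c.toNat (by omega) (by omega),
      if_pos (by omega : c.toNat < (D[r.toNat]).length),
      List.getD_eq_getElem D [] hrD]
  cases h : (D[r.toNat]).getD c.toNat none with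
  | some v => simp
  | none =>
    rw [List.getD_eq_getElem grid [] hrn]
    simp

lemma setCell_ov {grid : List (List Int)} {R C : Int} {D : List (List (Option Int))}
    (hRg : R.toNat = grid.length) (hCg : ∀ row ∈ grid, C.toNat ≤ row.length)
    (hD : DimsD R C D) {r c : Int} (hp : Inb R C (r, c)) (v : Int) :
    setCell (ov grid D) r c v = ov grid (setD D r c (some v)) := by
  obtain ⟨h1, h2, h3, h4⟩ := hp
  obtain ⟨hl, hrow⟩ := hD
  have hrn : r.toNat < grid.length := by omega
  have hrD : r.toNat < D.length := by omega
  have hrlen : C.toNat ≤ (grid[r.toNat]).length := hCg _ (List.getElem_mem hrn)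
  have hdlen : (D[r.toNat]).length = C.toNat := hrow _ (List.getElem_mem hrD)
  have hcn : c.toNat < C.toNat := by omega
  rw [setCell_nonneg _ _ _ h1 h3, setD_nonneg _ _ _ h1 h3]
  have hlen' : (D.set r.toNat ((D.getD r.toNat []).set c.toNat (some v))).length
      = grid.length := by simp [hl, hRg]
  apply List.ext_getElem
  · simp only [List.length_set, ov_length]
  · intro i hiL hiR
    have hig : i < grid.length := by
      simpa only [List.length_set, ov_length] using hiL
    rw [← List.getD_eq_getElem _ [] hiL, ← List.getD_eq_getElem _ [] hiR, getD_set,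
        ov_row grid _ hlen' i hig]
    rw [List.getElem_set]
    by_cases hir : r.toNat = i
    · subst hir
      rw [if_pos ⟨rfl, by rw [ov_length]; exact hrn⟩, if_pos rfl,
          ov_row grid D (by omega) r.toNat hrn, List.getD_eq_getElem D [] hrD]
      apply List.ext_getElem
      · simp only [List.length_set, ovRow_length]
      · intro j hjL hjR
        have hjrow : j < (grid[r.toNat]).length := by
          simpa only [List.length_set, ovRow_length] using hjL
        rw [← List.getD_eq_getElem _ 0 hjL, ← List.getD_eq_getElem _ 0 hjR, getD_set,
            ovRow_getD (grid[r.toNat]) ((D[r.toNat]).set c.toNat (some v)) j hjrow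
              (by simp only [List.length_set]; omega)]
        simp only [List.length_set]
        by_cases hjc : j = c.toNat
        · subst hjc
          rw [if_pos (show c.toNat = c.toNat ∧
                c.toNat < (ovRow (grid[r.toNat]) (D[r.toNat])).length from
                ⟨rfl, by rw [ovRow_length]; exact hjrow⟩)]
          rw [if_pos (show c.toNat < (D[r.toNat]).length from by omega)]
          rw [getD_set, if_pos (show c.toNat = c.toNat ∧ c.toNat < (D[r.toNat]).length from
                ⟨rfl, by omega⟩)]
          simp
        · rw [if_neg (show ¬(j = c.toNat ∧
                c.toNat < (ovRow (grid[r.toNat]) (D[r.toNat])).length) from fun hh => hjc hh.1)]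
          rw [getD_set, if_neg (show ¬(j = c.toNat ∧ c.toNat < (D[r.toNat]).length) from
                fun hh => hjc hh.1)]
          rw [ovRow_getD (grid[r.toNat]) (D[r.toNat]) j hjrow (by omega)]
    · rw [if_neg (by intro hh; exact hir hh.1.symm), if_neg hir,
          ov_row grid D (by omega) i hig]

lemma foldl_product {β γ α : Type} (l1 : List β) (l2 : List γ) (F : α → β × γ → α)
    (init : α) :
    (l1 ×ˢ l2).foldl F init
      = l1.foldl (fun s b => l2.foldl (fun s c => F s (b, c)) s) init := by
  rw [show l1 ×ˢ l2 = l1.flatMap (fun a => l2.map (Prod.mk a)) from rfl, List.foldl_flatMap]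
  simp only [List.foldl_map]

lemma D_ext {R C : Int} {D1 D2 : List (List (Option Int))}
    (h1 : DimsD R C D1) (h2 : DimsD R C D2)
    (hpt : ∀ p, Inb R C p → dAt D1 p.1 p.2 = dAt D2 p.1 p.2) : D1 = D2 := by
  obtain ⟨l1, r1⟩ := h1
  obtain ⟨l2, r2⟩ := h2
  apply List.ext_getElem (by omega)
  intro i hi1 hi2
  have hli : (D1[i]).length = C.toNat := r1 _ (List.getElem_mem hi1)
  have hli2 : (D2[i]).length = C.toNat := r2 _ (List.getElem_mem hi2)
  apply List.ext_getElem (by omega)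
  intro j hj1 hj2
  have hInb : Inb R C ((i : Int), (j : Int)) := by
    unfold Inb
    simp only
    omega
  have := hpt ((i : Int), (j : Int)) hInb
  rw [dAt_nonneg _ _ _ (by simp) (by simp), dAt_nonneg _ _ _ (by simp) (by simp)] at this
  simp only [Int.toNat_natCast] at this
  rw [List.getD_eq_getElem D1 [] hi1, List.getD_eq_getElem D2 [] hi2,
      List.getD_eq_getElem (D1[i]) none hj1, List.getD_eq_getElem (D2[i]) none hj2] at this
  exact this

lemma dims_initDist (grid : List (List Int)) (R C : Int) :
    DimsD R C (initDist grid R C) := by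
  unfold initDist DimsD
  constructor
  · simp [PySem.List.length_pyRange_one]
  · intro row h
    simp only [List.mem_map] at h
    obtain ⟨r, _, rfl⟩ := h
    simp [PySem.List.length_pyRange_one]

lemma dAt_initDist (grid : List (List Int)) {R C : Int} {r c : Int} (hp : Inb R C (r, c)) :
    dAt (initDist grid R C) r c = if cellAt grid r c = 0 then some 0 else none := by
  obtain ⟨h1, h2, h3, h4⟩ := hp
  unfold dAt initDist
  rw [PySem.List.pyGetD_map_pyRange_of_nonneg _ _ _ _ h1 h2,
      PySem.List.pyGetD_map_pyRange_of_nonneg _ _ _ _ h3 h4]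

lemma ov_initDist {grid : List (List Int)} {R C : Int}
    (hRg : R.toNat = grid.length) (hCg : ∀ row ∈ grid, C.toNat ≤ row.length) :
    ov grid (initDist grid R C) = grid := by
  have hdims := dims_initDist grid R C
  obtain ⟨hl, hrow⟩ := hdims
  apply List.ext_getElem (by rw [ov_length])
  intro i hi1 hi2
  rw [← List.getD_eq_getElem _ [] hi1, ov_row grid _ (by omega) i hi2]
  have hlen : ((initDist grid R C)[i]'(by omega)).length = C.toNat :=
    hrow _ (List.getElem_mem (by omega))
  have hrowlen : C.toNat ≤ (grid[i]).length := hCg _ (List.getElem_mem hi2)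
  apply List.ext_getElem (by rw [ovRow_length])
  intro j hj1 hj2
  rw [← List.getD_eq_getElem _ 0 hj1, ← List.getD_eq_getElem _ 0 hj2,
      ovRow_getD _ _ j (by rw [ovRow_length] at hj1; exact hj1) (by omega)]
  by_cases hjC : j < C.toNat
  · rw [if_pos (by omega)]
    have hInb : Inb R C ((i : Int), (j : Int)) := by
      unfold Inb
      simp only
      omega
    have hget : ((initDist grid R C)[i]'(by omega)).getD j none
        = if cellAt grid (i : Int) (j : Int) = 0 then some 0 else none := by
      have := dAt_initDist grid hInb
      rw [dAt_nonneg _ _ _ (by simp) (by simp)] at this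
      simp only [Int.toNat_natCast] at this
      rw [List.getD_eq_getElem _ [] (by omega : i < (initDist grid R C).length)] at this
      exact this
    rw [hget]
    have hcell : cellAt grid (i : Int) (j : Int) = (grid[i]).getD j 0 := by
      rw [cellAt_nonneg _ _ _ (by simp) (by simp)]
      simp only [Int.toNat_natCast]
      rw [List.getD_eq_getElem grid [] hi2]
    by_cases hz : cellAt grid (i : Int) (j : Int) = 0
    · rw [if_pos hz]
      simp only [Option.getD_some]
      rw [← hcell, hz]
    · rw [if_neg hz]
      simp
  · rw [if_neg (by omega)]

-- membership characterisation of get_gates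
lemma mem_gates_inner (grid : List (List Int)) (ri : Int) :
    ∀ (cs : List Int) (acc : List (Int × Int)) (q : Int × Int),
    q ∈ cs.foldl (fun l ci => if cellAt grid ri ci = 0 then l ++ [(ri, ci)] else l) acc
      ↔ q ∈ acc ∨ (∃ ci ∈ cs, q = (ri, ci) ∧ cellAt grid ri ci = 0) := by
  intro cs
  induction cs with
  | nil => intro acc q; simp
  | cons c rest ih =>
    intro acc q
    simp only [List.foldl_cons]
    by_cases h : cellAt grid ri c = 0
    · rw [if_pos h, ih]
      simp only [List.mem_append, List.mem_cons, List.not_mem_nil, or_false]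
      constructor
      · rintro (⟨hq | hq⟩ | ⟨ci, hci, rfl, hz⟩)
        · exact Or.inl hq
        · exact Or.inr ⟨c, Or.inl rfl, hq, h⟩
        · exact Or.inr ⟨ci, Or.inr hci, rfl, hz⟩
      · rintro (hq | ⟨ci, (hci | hci), rfl, hz⟩)
        · exact Or.inl (Or.inl hq)
        · subst hci; exact Or.inl (Or.inr rfl)
        · exact Or.inr ⟨ci, hci, rfl, hz⟩
    · rw [if_neg h, ih]
      constructor
      · rintro (hq | ⟨ci, hci, rfl, hz⟩)
        · exact Or.inl hq
        · exact Or.inr ⟨ci, List.mem_cons_of_mem _ hci, rfl, hz⟩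
      · rintro (hq | ⟨ci, hci, rfl, hz⟩)
        · exact Or.inl hq
        · rcases List.mem_cons.mp hci with hci | hci
          · subst hci; exact absurd hz h
          · exact Or.inr ⟨ci, hci, rfl, hz⟩

lemma mem_getGates (grid : List (List Int)) (q : Int × Int) :
    q ∈ getGates grid
      ↔ Inb (PySem.List.len grid) (PySem.List.len (PySem.List.pyGetD grid 0 [])) q
          ∧ cellAt grid q.1 q.2 = 0 := by
  unfold getGates
  have houter : ∀ (rs : List Int) (acc : List (Int × Int)),
      q ∈ rs.foldl (fun l ri =>
          (PySem.List.pyRange 0 (PySem.List.len (PySem.List.pyGetD grid 0 [])) 1).foldl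
            (fun l ci => if cellAt grid ri ci = 0 then l ++ [(ri, ci)] else l) l) acc
        ↔ q ∈ acc ∨ (∃ ri ∈ rs, ∃ ci ∈ PySem.List.pyRange 0
              (PySem.List.len (PySem.List.pyGetD grid 0 [])) 1,
              q = (ri, ci) ∧ cellAt grid ri ci = 0) := by
    intro rs
    induction rs with
    | nil => intro acc; simp
    | cons r rest ih =>
      intro acc
      simp only [List.foldl_cons]
      rw [ih, mem_gates_inner]
      constructor
      · rintro (⟨hq | ⟨ci, hci, rfl, hz⟩⟩ | ⟨ri, hri, ci, hci, rfl, hz⟩)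
        · exact Or.inl hq
        · exact Or.inr ⟨r, List.mem_cons_self .., ci, hci, rfl, hz⟩
        · exact Or.inr ⟨ri, List.mem_cons_of_mem _ hri, ci, hci, rfl, hz⟩
      · rintro (hq | ⟨ri, hri, ci, hci, rfl, hz⟩)
        · exact Or.inl (Or.inl hq)
        · rcases List.mem_cons.mp hri with hri | hri
          · subst hri; exact Or.inl (Or.inr ⟨ci, hci, rfl, hz⟩)
          · exact Or.inr ⟨ri, hri, ci, hci, rfl, hz⟩
  rw [houter]
  simp only [List.not_mem_nil, false_or, PySem.List.mem_pyRange_one]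
  unfold Inb
  constructor
  · rintro ⟨ri, hri, ci, hci, rfl, hz⟩
    exact ⟨⟨hri.1, hri.2, hci.1, hci.2⟩, hz⟩
  · rintro ⟨⟨ha, hb, hc, hd⟩, hz⟩
    exact ⟨q.1, ⟨ha, hb⟩, q.2, ⟨hc, hd⟩, rfl, hz⟩

-- ---- sweep (pull) side ----

def sstep (grid : List (List Int)) (R C d : Int)
    (s : List (List (Option Int)) × Bool) (p : Int × Int) :
    List (List (Option Int)) × Bool :=
  if pullTry grid R C d s.1 p.1 p.2 then (setD s.1 p.1 p.2 (some (d + 1)), true) else s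

lemma sweep_eq_prod (grid : List (List Int)) (R C d : Int) (D0 : List (List (Option Int))) :
    sweep grid R C d D0 = (allCells R C).foldl (sstep grid R C d) (D0, false) := by
  unfold sweep allCells
  rw [foldl_product]
  rfl

lemma pullTry_clause_congr {R C d : Int} {D D₁ : List (List (Option Int))}
    {P : List (Int × Int)}
    (hchar : ∀ p, Inb R C p → dAt D₁ p.1 p.2 = if p ∈ P then some (d+1) else dAt D p.1 p.2)
    (hP : ∀ p ∈ P, dAt D p.1 p.2 = none) (nb : Int × Int) :
    (decide (0 ≤ nb.1) && decide (nb.1 < R) && decide (0 ≤ nb.2) && decide (nb.2 < C) &&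
      (dAt D₁ nb.1 nb.2 == some d))
    = (decide (0 ≤ nb.1) && decide (nb.1 < R) && decide (0 ≤ nb.2) && decide (nb.2 < C) &&
      (dAt D nb.1 nb.2 == some d)) := by
  by_cases hInb : Inb R C nb
  · obtain ⟨h1, h2, h3, h4⟩ := hInb
    by_cases hmem : nb ∈ P
    · rw [show dAt D₁ nb.1 nb.2 = some (d+1) from by
          rw [hchar nb ⟨h1, h2, h3, h4⟩, if_pos hmem], hP nb hmem]
      simp [show (d + 1 : Int) ≠ d from by omega]
    · rw [hchar nb ⟨h1, h2, h3, h4⟩, if_neg hmem]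
  · have hb : (decide (0 ≤ nb.1) && decide (nb.1 < R) && decide (0 ≤ nb.2) && decide (nb.2 < C))
        = false := by
      unfold Inb at hInb
      simp only [Bool.and_eq_false_iff, decide_eq_false_iff_not]
      omega
    rw [hb, Bool.false_and, Bool.false_and]

lemma pullTry_congr {grid : List (List Int)} {R C d : Int} {D D₁ : List (List (Option Int))}
    {P : List (Int × Int)}
    (hchar : ∀ p, Inb R C p → dAt D₁ p.1 p.2 = if p ∈ P then some (d+1) else dAt D p.1 p.2)
    (hP : ∀ p ∈ P, dAt D p.1 p.2 = none)
    (q : Int × Int) (hq : Inb R C q) (hqP : q ∉ P) :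
    pullTry grid R C d D₁ q.1 q.2 = pullTry grid R C d D q.1 q.2 := by
  unfold pullTry
  rw [show dAt D₁ q.1 q.2 = dAt D q.1 q.2 from by rw [hchar q hq, if_neg hqP]]
  have hany : ([(q.1 + 1, q.2), (q.1, q.2 + 1), (q.1 - 1, q.2), (q.1, q.2 - 1)].any
        (fun nb => decide (0 ≤ nb.1) && decide (nb.1 < R) && decide (0 ≤ nb.2) &&
          decide (nb.2 < C) && (dAt D₁ nb.1 nb.2 == some d)))
      = ([(q.1 + 1, q.2), (q.1, q.2 + 1), (q.1 - 1, q.2), (q.1, q.2 - 1)].any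
        (fun nb => decide (0 ≤ nb.1) && decide (nb.1 < R) && decide (0 ≤ nb.2) &&
          decide (nb.2 < C) && (dAt D nb.1 nb.2 == some d))) := by
    rw [show (fun nb : Int × Int => decide (0 ≤ nb.1) && decide (nb.1 < R) &&
          decide (0 ≤ nb.2) && decide (nb.2 < C) && (dAt D₁ nb.1 nb.2 == some d))
        = (fun nb : Int × Int => decide (0 ≤ nb.1) && decide (nb.1 < R) &&
          decide (0 ≤ nb.2) && decide (nb.2 < C) && (dAt D nb.1 nb.2 == some d)) from
      funext fun nb => pullTry_clause_congr hchar hP nb]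
  rw [hany]

lemma sweepAux {grid : List (List Int)} {R C d : Int} {D : List (List (Option Int))} :
    ∀ (l : List (Int × Int)), l.Nodup → (∀ p ∈ l, Inb R C p) →
    ∀ (P : List (Int × Int)) (D₁ : List (List (Option Int))) (b₁ : Bool),
      DimsD R C D₁ →
      (∀ p ∈ P, Inb R C p ∧ dAt D p.1 p.2 = none) →
      (∀ p ∈ P, p ∉ l) →
      (∀ p, Inb R C p → dAt D₁ p.1 p.2 = if p ∈ P then some (d+1) else dAt D p.1 p.2) →
      DimsD R C (l.foldl (sstep grid R C d) (D₁, b₁)).1 ∧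
      (∀ p, Inb R C p → dAt (l.foldl (sstep grid R C d) (D₁, b₁)).1 p.1 p.2 =
        if p ∈ P ∨ (p ∈ l ∧ pullTry grid R C d D p.1 p.2 = true) then some (d+1)
        else dAt D p.1 p.2) ∧
      (l.foldl (sstep grid R C d) (D₁, b₁)).2
        = (b₁ || l.any (fun p => pullTry grid R C d D p.1 p.2)) := by
  intro l
  induction l with
  | nil =>
    intro _ _ P D₁ b₁ hD₁ hP hPl hchar
    refine ⟨hD₁, ?_, by simp⟩
    intro p hp
    simp only [List.foldl_nil]
    rw [hchar p hp]
    simp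
  | cons q rest ih =>
    intro hnd hl P D₁ b₁ hD₁ hP hPl hchar
    have hq : Inb R C q := hl q List.mem_cons_self
    have hqP : q ∉ P := fun h => hPl q h List.mem_cons_self
    have hcong := pullTry_congr (grid := grid) hchar (fun p hp => (hP p hp).2) q hq hqP
    simp only [List.foldl_cons, sstep]
    by_cases hpull : pullTry grid R C d D q.1 q.2 = true
    · rw [hcong, if_pos hpull]
      have hDnone : dAt D q.1 q.2 = none := by
        unfold pullTry at hpull
        simp only [Bool.and_eq_true, beq_iff_eq] at hpull
        exact hpull.1.1
      have hqpair : Inb R C (q.1, q.2) := by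
        cases q; exact hq
      obtain ⟨c1, c2, c3⟩ := ih hnd.of_cons (fun p hp => hl p (List.mem_cons_of_mem _ hp))
        (q :: P) (setD D₁ q.1 q.2 (some (d+1))) true
        (dims_setD hD₁ hqpair _)
        (by intro p hp
            rcases List.mem_cons.mp hp with rfl | hp'
            · exact ⟨hq, hDnone⟩
            · exact hP p hp')
        (by intro p hp
            rcases List.mem_cons.mp hp with rfl | hp'
            · exact (List.nodup_cons.mp hnd).1
            · intro hr; exact hPl p hp' (List.mem_cons_of_mem _ hr))
        (by intro p hp
            by_cases hpq : p = q
            · subst hpq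
              rw [show dAt (setD D₁ p.1 p.2 (some (d+1))) p.1 p.2 = some (d+1) from by
                    cases p; exact dAt_setD_self hD₁ hqpair _]
              simp
            · rw [dAt_setD_ne hD₁ hqpair _ p.1 p.2 hp.1 hp.2.2.1
                    (by cases p; cases q; simpa [Prod.ext_iff] using hpq), hchar p hp]
              exact if_congr (by simp [List.mem_cons, hpq]) rfl rfl)
      refine ⟨c1, ?_, ?_⟩
      · intro p hp
        rw [c2 p hp]
        apply if_congr ?_ rfl rfl
        simp only [List.mem_cons]
        constructor
        · rintro ((rfl | hp') | ⟨hr, hpl⟩)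
          · exact Or.inr ⟨Or.inl rfl, hpull⟩
          · exact Or.inl hp'
          · exact Or.inr ⟨Or.inr hr, hpl⟩
        · rintro (hp' | ⟨(rfl | hr), hpl⟩)
          · exact Or.inl (Or.inr hp')
          · exact Or.inl (Or.inl rfl)
          · exact Or.inr ⟨hr, hpl⟩
      · rw [c3]
        simp [hpull]
    · simp only [Bool.not_eq_true] at hpull
      rw [hcong, hpull]
      simp only [Bool.false_eq_true, if_false]
      obtain ⟨c1, c2, c3⟩ := ih hnd.of_cons (fun p hp => hl p (List.mem_cons_of_mem _ hp))
        P D₁ b₁ hD₁ hP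
        (fun p hp hr => hPl p hp (List.mem_cons_of_mem _ hr)) hchar
      refine ⟨c1, ?_, ?_⟩
      · intro p hp
        rw [c2 p hp]
        apply if_congr ?_ rfl rfl
        simp only [List.mem_cons]
        constructor
        · rintro (hp' | ⟨hr, hpl⟩)
          · exact Or.inl hp'
          · exact Or.inr ⟨Or.inr hr, hpl⟩
        · rintro (hp' | ⟨(rfl | hr), hpl⟩)
          · exact Or.inl hp'
          · rw [hpl] at hpull; cases hpull
          · exact Or.inr ⟨hr, hpl⟩
      · rw [c3]
        simp [hpull]

lemma sweep_char {grid : List (List Int)} {R C d : Int} {D : List (List (Option Int))}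
    (hD : DimsD R C D) :
    DimsD R C (sweep grid R C d D).1 ∧
    (∀ p, Inb R C p → dAt (sweep grid R C d D).1 p.1 p.2 =
      if pullTry grid R C d D p.1 p.2 = true then some (d+1) else dAt D p.1 p.2) ∧
    ((sweep grid R C d D).2 = (allCells R C).any (fun p => pullTry grid R C d D p.1 p.2)) := by
  rw [sweep_eq_prod]
  obtain ⟨c1, c2, c3⟩ := sweepAux (grid := grid) (d := d) (D := D) (allCells R C)
    (nodup_allCells R C) (fun p hp => by
      have := (mem_allCells R C p).mp hp
      exact this)
    [] D false hD (by simp) (by simp)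
    (by intro p hp; simp)
  refine ⟨c1, ?_, by simpa using c3⟩
  intro p hp
  rw [c2 p hp]
  apply if_congr ?_ rfl rfl
  simp only [List.not_mem_nil, false_or]
  constructor
  · rintro ⟨_, h⟩; exact h
  · intro h; exact ⟨(mem_allCells R C p).mpr hp, h⟩

-- ---- push (level-BFS) side ----

lemma mem_pyNbrs_symm (p q : Int × Int) : p ∈ pyNbrs q ↔ q ∈ pyNbrs p := by
  unfold pyNbrs
  cases p
  cases q
  simp only [List.mem_cons, List.not_mem_nil, or_false, Prod.mk.injEq]
  omega

lemma foldB_flatMap (R C d : Int) :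
    ∀ (F : List (Int × Int)) (s : List (List Int) × PySem.Set (Int × Int) × List (Int × Int)),
    F.foldl (stepB R C d) s = (F.flatMap pyNbrs).foldl (stepN R C d) s := by
  intro F
  induction F with
  | nil => intro s; rfl
  | cons q rest ih =>
    intro s
    simp only [List.foldl_cons, List.flatMap_cons]
    rw [List.foldl_append, stepB_eq, ih]

lemma pushAux {grid : List (List Int)} {R C d : Int} {D : List (List (Option Int))}
    (hRg : R.toNat = grid.length) (hCg : ∀ row ∈ grid, C.toNat ≤ row.length) :
    ∀ (L : List (Int × Int)) (P : List (Int × Int)) (D₁ : List (List (Option Int)))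
      (vis : PySem.Set (Int × Int)) (nxt : List (Int × Int)),
    DimsD R C D₁ →
    (∀ p ∈ P, Inb R C p ∧ dAt D p.1 p.2 = none ∧ cellAt grid p.1 p.2 ≠ -1) →
    (∀ p, Inb R C p → dAt D₁ p.1 p.2 = if p ∈ P then some (d+1) else dAt D p.1 p.2) →
    (∀ p, Inb R C p → (PySem.Set.contains vis p = true ↔ dAt D₁ p.1 p.2 ≠ none)) →
    (∀ p, p ∈ nxt ↔ p ∈ P) →
    ∃ (D₂ : List (List (Option Int))) (P₂ : List (Int × Int)),
      (L.foldl (stepN R C d) (ov grid D₁, vis, nxt)).1 = ov grid D₂ ∧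
      DimsD R C D₂ ∧
      (∀ p ∈ P₂, Inb R C p ∧ dAt D p.1 p.2 = none ∧ cellAt grid p.1 p.2 ≠ -1) ∧
      (∀ p, Inb R C p → dAt D₂ p.1 p.2 = if p ∈ P₂ then some (d+1) else dAt D p.1 p.2) ∧
      (∀ p, Inb R C p →
        (PySem.Set.contains (L.foldl (stepN R C d) (ov grid D₁, vis, nxt)).2.1 p = true
          ↔ dAt D₂ p.1 p.2 ≠ none)) ∧
      (∀ p, p ∈ (L.foldl (stepN R C d) (ov grid D₁, vis, nxt)).2.2 ↔ p ∈ P₂) ∧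
      (∀ p, p ∈ P₂ ↔ p ∈ P ∨
        (Inb R C p ∧ dAt D p.1 p.2 = none ∧ cellAt grid p.1 p.2 ≠ -1 ∧ p ∈ L)) := by
  intro L
  induction L with
  | nil =>
    intro P D₁ vis nxt hD₁ hP hchar hvis hnxt
    refine ⟨D₁, P, rfl, hD₁, hP, hchar, hvis, hnxt, ?_⟩
    simp
  | cons nb rest ih =>
    intro P D₁ vis nxt hD₁ hP hchar hvis hnxt
    have hcond : (decide (0 ≤ nb.1) && decide (nb.1 < R) && decide (0 ≤ nb.2) &&
        decide (nb.2 < C) && (cellAt (ov grid D₁) nb.1 nb.2 != -1) &&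
        !(PySem.Set.contains vis nb)) = true
        ↔ (Inb R C nb ∧ dAt D nb.1 nb.2 = none ∧ cellAt grid nb.1 nb.2 ≠ -1 ∧ nb ∉ P) := by
      simp only [Bool.and_eq_true, decide_eq_true_eq, bne_iff_ne, Bool.not_eq_true',
        ne_eq]
      constructor
      · rintro ⟨⟨⟨⟨⟨h1, h2⟩, h3⟩, h4⟩, h5⟩, h6⟩
        have hInb : Inb R C nb := ⟨h1, h2, h3, h4⟩
        have hD₁nb : dAt D₁ nb.1 nb.2 = none := by
          by_contra hne
          rw [(hvis nb hInb).mpr hne] at h6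
          cases h6
        have hnotP : nb ∉ P := by
          intro hmem
          rw [hchar nb hInb, if_pos hmem] at hD₁nb
          cases hD₁nb
        have hDnb : dAt D nb.1 nb.2 = none := by
          have := hchar nb hInb
          rw [if_neg hnotP] at this
          rw [← this]; exact hD₁nb
        have hcell : cellAt (ov grid D₁) nb.1 nb.2 = cellAt grid nb.1 nb.2 := by
          have := cellAt_ov hRg hCg hD₁ (r := nb.1) (c := nb.2) (by cases nb; exact hInb)
          rw [this, hD₁nb]
        rw [hcell] at h5
        exact ⟨hInb, hDnb, h5, hnotP⟩
      · rintro ⟨hInb, hDnb, hcell, hnotP⟩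
        have hD₁nb : dAt D₁ nb.1 nb.2 = none := by
          rw [hchar nb hInb, if_neg hnotP]; exact hDnb
        have hcontains : PySem.Set.contains vis nb = false := by
          rw [← Bool.not_eq_true]
          intro hc
          exact ((hvis nb hInb).mp hc) hD₁nb
        have hcellov : cellAt (ov grid D₁) nb.1 nb.2 = cellAt grid nb.1 nb.2 := by
          have := cellAt_ov hRg hCg hD₁ (r := nb.1) (c := nb.2) (by cases nb; exact hInb)
          rw [this, hD₁nb]
        obtain ⟨h1, h2, h3, h4⟩ := hInb
        exact ⟨⟨⟨⟨⟨h1, h2⟩, h3⟩, h4⟩, by rw [hcellov]; exact hcell⟩, hcontains⟩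
    simp only [List.foldl_cons, stepN]
    by_cases hc : Inb R C nb ∧ dAt D nb.1 nb.2 = none ∧ cellAt grid nb.1 nb.2 ≠ -1 ∧ nb ∉ P
    · rw [if_pos (hcond.mpr hc)]
      obtain ⟨hInb, hDnb, hcellnb, hnotP⟩ := hc
      have hnbpair : Inb R C (nb.1, nb.2) := by cases nb; exact hInb
      have hsetov : setCell (ov grid D₁) nb.1 nb.2 (d + 1)
          = ov grid (setD D₁ nb.1 nb.2 (some (d + 1))) :=
        setCell_ov hRg hCg hD₁ hnbpair (d + 1)
      rw [hsetov]
      obtain ⟨D₂, P₂, e1, e2, e3, e4, e5, e6, e7⟩ := ih (P ++ [nb])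
        (setD D₁ nb.1 nb.2 (some (d+1))) (PySem.Set.add vis nb) (nxt ++ [nb])
        (dims_setD hD₁ hnbpair _)
        (by intro p hp
            rcases List.mem_append.mp hp with hp' | hp'
            · exact hP p hp'
            · rw [List.mem_singleton.mp hp']
              exact ⟨hInb, hDnb, hcellnb⟩)
        (by intro p hp
            by_cases hpq : p = nb
            · subst hpq
              rw [show dAt (setD D₁ p.1 p.2 (some (d+1))) p.1 p.2 = some (d+1) from by
                    cases p; exact dAt_setD_self hD₁ hnbpair _]
              rw [if_pos (List.mem_append.mpr (Or.inr (List.mem_singleton.mpr rfl)))]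
            · rw [dAt_setD_ne hD₁ hnbpair _ p.1 p.2 hp.1 hp.2.2.1
                    (by cases p; cases nb; simpa [Prod.ext_iff] using hpq), hchar p hp]
              exact if_congr (by simp [List.mem_append, hpq]) rfl rfl)
        (by intro p hp
            rw [PySem.Set.contains_iff, PySem.Set.mem_add]
            by_cases hpq : p = nb
            · subst hpq
              rw [show dAt (setD D₁ p.1 p.2 (some (d+1))) p.1 p.2 = some (d+1) from by
                    cases p; exact dAt_setD_self hD₁ hnbpair _]
              simp
            · rw [dAt_setD_ne hD₁ hnbpair _ p.1 p.2 hp.1 hp.2.2.1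
                    (by cases p; cases nb; simpa [Prod.ext_iff] using hpq)]
              rw [← PySem.Set.contains_iff, hvis p hp]
              simp [hpq])
        (by intro p
            rw [List.mem_append, List.mem_append, hnxt p])
      refine ⟨D₂, P₂, e1, e2, e3, e4, e5, e6, ?_⟩
      intro p
      rw [e7 p]
      constructor
      · rintro (hp' | ⟨ha, hb, hcc, hd⟩)
        · rcases List.mem_append.mp hp' with hp'' | hp''
          · exact Or.inl hp''
          · rw [List.mem_singleton.mp hp'']
            exact Or.inr ⟨hInb, hDnb, hcellnb, List.mem_cons_self ..⟩
        · exact Or.inr ⟨ha, hb, hcc, List.mem_cons_of_mem _ hd⟩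
      · rintro (hp' | ⟨ha, hb, hcc, hd⟩)
        · exact Or.inl (List.mem_append.mpr (Or.inl hp'))
        · rcases List.mem_cons.mp hd with rfl | hd'
          · exact Or.inl (List.mem_append.mpr (Or.inr (List.mem_singleton.mpr rfl)))
          · exact Or.inr ⟨ha, hb, hcc, hd'⟩
    · rw [if_neg (fun h => hc (hcond.mp h))]
      obtain ⟨D₂, P₂, e1, e2, e3, e4, e5, e6, e7⟩ := ih P D₁ vis nxt hD₁ hP hchar hvis hnxt
      refine ⟨D₂, P₂, e1, e2, e3, e4, e5, e6, ?_⟩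
      intro p
      rw [e7 p]
      constructor
      · rintro (hp' | ⟨ha, hb, hcc, hd⟩)
        · exact Or.inl hp'
        · exact Or.inr ⟨ha, hb, hcc, List.mem_cons_of_mem _ hd⟩
      · rintro (hp' | ⟨ha, hb, hcc, hd⟩)
        · exact Or.inl hp'
        · rcases List.mem_cons.mp hd with rfl | hd'
          · by_cases hpP : p ∈ P
            · exact Or.inl hpP
            · exact absurd ⟨ha, hb, hcc, hpP⟩ hc
          · exact Or.inr ⟨ha, hb, hcc, hd'⟩

-- ---- one wave = one sweep ----

def BfsInv (grid : List (List Int)) (R C : Int) (D : List (List (Option Int)))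
    (g : List (List Int)) (vis : PySem.Set (Int × Int)) (F : List (Int × Int)) (d : Int) :
    Prop :=
  DimsD R C D ∧ g = ov grid D ∧
  (∀ p, Inb R C p → (PySem.Set.contains vis p = true ↔ dAt D p.1 p.2 ≠ none)) ∧
  (∀ p, p ∈ F ↔ (Inb R C p ∧ dAt D p.1 p.2 = some d)) ∧
  (∀ p v, Inb R C p → dAt D p.1 p.2 = some v → v ≤ d)

lemma pull_iff (grid : List (List Int)) (R C d : Int) (D : List (List (Option Int)))
    (p : Int × Int) :
    pullTry grid R C d D p.1 p.2 = true
      ↔ (dAt D p.1 p.2 = none ∧ cellAt grid p.1 p.2 ≠ -1 ∧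
          ∃ q ∈ pyNbrs p, Inb R C q ∧ dAt D q.1 q.2 = some d) := by
  unfold pullTry pyNbrs Inb
  simp only [Bool.and_eq_true, beq_iff_eq, bne_iff_ne, List.any_eq_true, decide_eq_true_eq,
    ne_eq]
  tauto

lemma wave {grid : List (List Int)} {R C d : Int} {D : List (List (Option Int))}
    {g : List (List Int)} {vis : PySem.Set (Int × Int)} {F : List (Int × Int)}
    (hRg : R.toNat = grid.length) (hCg : ∀ row ∈ grid, C.toNat ≤ row.length)
    (hInv : BfsInv grid R C D g vis F d) :
    (F.foldl (stepB R C d) (g, vis, ([] : List (Int × Int)))).1 = ov grid (sweep grid R C d D).1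
    ∧ BfsInv grid R C (sweep grid R C d D).1
        (F.foldl (stepB R C d) (g, vis, ([] : List (Int × Int)))).1
        (F.foldl (stepB R C d) (g, vis, ([] : List (Int × Int)))).2.1
        (F.foldl (stepB R C d) (g, vis, ([] : List (Int × Int)))).2.2 (d+1)
    ∧ ((sweep grid R C d D).2 = true
        ↔ (F.foldl (stepB R C d) (g, vis, ([] : List (Int × Int)))).2.2 ≠ []) := by
  obtain ⟨hD, hg, hvis, hF, hval⟩ := hInv
  subst hg
  rw [foldB_flatMap]
  obtain ⟨D₂, P₂, e1, e2, e3, e4, e5, e6, e7⟩ := pushAux (d := d) (D := D) hRg hCg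
    (F.flatMap pyNbrs) [] D vis []
    hD (by simp) (by intro p hp; simp) hvis (by simp)
  obtain ⟨s1, s2, s3⟩ := sweep_char (grid := grid) (d := d) hD
  have keyiff : ∀ p, p ∈ P₂ ↔ (Inb R C p ∧ pullTry grid R C d D p.1 p.2 = true) := by
    intro p
    rw [e7 p, pull_iff grid R C d D p]
    simp only [List.not_mem_nil, false_or, List.mem_flatMap]
    constructor
    · rintro ⟨hInb, hnone, hcell, q, hqF, hpq⟩
      refine ⟨hInb, hnone, hcell, q, (mem_pyNbrs_symm q p).mpr hpq, ?_⟩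
      exact (hF q).mp hqF
    · rintro ⟨hInb, hnone, hcell, q, hq, hqprop⟩
      exact ⟨hInb, hnone, hcell, q, (hF q).mpr hqprop, (mem_pyNbrs_symm q p).mp hq⟩
  have hDeq : D₂ = (sweep grid R C d D).1 := by
    apply D_ext e2 s1
    intro p hp
    rw [e4 p hp, s2 p hp]
    exact if_congr (by rw [keyiff p]; exact ⟨fun h => h.2, fun h => ⟨hp, h⟩⟩) rfl rfl
  have hmemP : ∀ p, p ∈ P₂ ↔ (Inb R C p ∧ dAt (sweep grid R C d D).1 p.1 p.2 = some (d+1)) := by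
    intro p
    rw [keyiff p]
    constructor
    · rintro ⟨hInb, hpl⟩
      refine ⟨hInb, ?_⟩
      rw [s2 p hInb, if_pos hpl]
    · rintro ⟨hInb, hsome⟩
      refine ⟨hInb, ?_⟩
      rw [s2 p hInb] at hsome
      by_cases hpl : pullTry grid R C d D p.1 p.2 = true
      · exact hpl
      · rw [if_neg hpl] at hsome
        have := hval p (d+1) hInb hsome
        omega
  refine ⟨by rw [e1, hDeq], ⟨s1, by rw [e1, hDeq], ?_, ?_, ?_⟩, ?_⟩
  · intro p hp
    rw [e5 p hp, hDeq]
  · intro p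
    rw [e6 p, hmemP p]
  · intro p v hp hsome
    rw [s2 p hp] at hsome
    by_cases hpl : pullTry grid R C d D p.1 p.2 = true
    · rw [if_pos hpl] at hsome
      cases hsome
      omega
    · rw [if_neg hpl] at hsome
      have := hval p v hp hsome
      omega
  · rw [s3, List.any_eq_true]
    constructor
    · rintro ⟨p, hpall, hpl⟩
      have hne : p ∈ (List.foldl (stepN R C d) (ov grid D, vis, []) (F.flatMap pyNbrs)).2.2 :=
        (e6 p).mpr ((keyiff p).mpr ⟨(mem_allCells R C p).mp hpall, hpl⟩)
      intro hnil
      rw [hnil] at hne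
      cases hne
    · intro hne
      obtain ⟨p, hp⟩ := List.exists_mem_of_ne_nil _ hne
      have hP₂ := (e6 p).mp hp
      have := (keyiff p).mp hP₂
      exact ⟨p, (mem_allCells R C p).mpr this.1, this.2⟩

lemma loopB_nil (R C : Int) (f : Nat) (g : List (List Int)) (vis : PySem.Set (Int × Int))
    (d : Int) : wagLoopB R C f g vis [] d = g := by cases f <;> rfl

lemma syncLoop {grid : List (List Int)} {R C : Int}
    (hRg : R.toNat = grid.length) (hCg : ∀ row ∈ grid, C.toNat ≤ row.length) :
    ∀ (fuel : Nat) (D : List (List (Option Int))) (g : List (List Int))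
      (vis : PySem.Set (Int × Int)) (F : List (Int × Int)) (d : Int),
    BfsInv grid R C D g vis F d →
    wagLoopB R C fuel g vis F d = ov grid (pullLoop grid R C fuel D d)
      ∧ DimsD R C (pullLoop grid R C fuel D d) := by
  intro fuel
  induction fuel with
  | zero =>
    intro D g vis F d hInv
    exact ⟨hInv.2.1, hInv.1⟩
  | succ f ih =>
    intro D g vis F d hInv
    obtain ⟨w1, w2, w3⟩ := wave hRg hCg hInv
    have hpull : pullLoop grid R C (f+1) D d
        = if (sweep grid R C d D).2 then pullLoop grid R C f (sweep grid R C d D).1 (d+1)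
          else (sweep grid R C d D).1 := rfl
    cases F with
    | nil =>
      have hflag : (sweep grid R C d D).2 = false := by
        rcases Bool.eq_false_or_eq_true (sweep grid R C d D).2 with hb | hb
        · exact absurd (by simpa using w3.mp hb) (fun h => h)
        · exact hb
      rw [loopB_nil, hpull, hflag]
      simp only [Bool.false_eq_true, if_false]
      exact ⟨by simpa using w1, w2.1⟩
    | cons a F' =>
      show wagLoopB R C f ((a :: F').foldl (stepB R C d) (g, vis, [])).1
            ((a :: F').foldl (stepB R C d) (g, vis, [])).2.1
            ((a :: F').foldl (stepB R C d) (g, vis, [])).2.2 (d+1)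
          = ov grid (pullLoop grid R C (f+1) D d)
          ∧ DimsD R C (pullLoop grid R C (f+1) D d)
      by_cases hflag : (sweep grid R C d D).2 = true
      · rw [hpull, if_pos hflag]
        exact ih (sweep grid R C d D).1 _ _ _ (d+1) w2
      · have hnil : ((a :: F').foldl (stepB R C d) (g, vis, ([] : List (Int × Int)))).2.2 = [] := by
          by_contra hne
          exact hflag (w3.mpr hne)
        rw [hpull, if_neg hflag, hnil, loopB_nil]
        exact ⟨w1, w2.1⟩

-- ---- the write-back pass produces the overlay ----

lemma row_of_setCell (g : List (List Int)) (r c v : Int) (hr0 : 0 ≤ r) (hc0 : 0 ≤ c)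
    (hrlen : r.toNat < g.length) :
    PySem.List.pyGetD (setCell g r c v) r [] = PySem.List.pySetD (PySem.List.pyGetD g r []) c v := by
  rw [setCell_nonneg _ _ _ hr0 hc0, pyGetD_nonneg _ _ hr0, pyGetD_nonneg _ _ hr0,
      PySem.List.pySetD_of_nonneg _ _ hc0, getD_set, if_pos ⟨rfl, hrlen⟩]

lemma wbInner {D : List (List (Option Int))} (r : Int) (hr0 : 0 ≤ r) :
    ∀ (cs : List Int), (∀ c ∈ cs, 0 ≤ c) → ∀ (g : List (List Int)), r.toNat < g.length →
    cs.foldl (fun g c => match dAt D r c with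
      | some v => setCell g r c v
      | none => g) g
      = PySem.List.pySetD g r
          (cs.foldl (fun row c => match dAt D r c with
            | some v => PySem.List.pySetD row c v
            | none => row) (PySem.List.pyGetD g r [])) := by
  intro cs
  induction cs with
  | nil =>
    intro _ g hg
    simp only [List.foldl_nil]
    rw [pyGetD_nonneg _ _ hr0, PySem.List.pySetD_of_nonneg _ _ hr0,
        List.getD_eq_getElem g [] hg, List.set_getElem_self hg]
  | cons c rest ih =>
    intro hcs g hg
    have hc0 : (0 : Int) ≤ c := hcs c List.mem_cons_self
    simp only [List.foldl_cons]
    cases hdc : dAt D r c with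
    | none =>
      exact ih (fun x hx => hcs x (List.mem_cons_of_mem _ hx)) g hg
    | some v =>
      rw [ih (fun x hx => hcs x (List.mem_cons_of_mem _ hx)) (setCell g r c v)
            (by rw [setCell_nonneg _ _ _ hr0 hc0]; simpa using hg),
          row_of_setCell g r c v hr0 hc0 hg,
          setCell_nonneg _ _ _ hr0 hc0,
          PySem.List.pySetD_of_nonneg _ _ hr0, PySem.List.pySetD_of_nonneg _ _ hr0,
          List.set_set]

lemma set_append_len {α : Type} (l1 l2 : List α) (x : α) :
    (l1 ++ l2).set l1.length x = l1 ++ l2.set 0 x := by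
  induction l1 with
  | nil => simp
  | cons a t ih => simp [ih]

lemma set_append_len' {α : Type} (l1 l2 : List α) (n : Nat) (h : l1.length = n) (x : α) :
    (l1 ++ l2).set n x = l1 ++ l2.set 0 x := by
  subst h
  exact set_append_len _ _ _

lemma getD_append_len {α : Type} (l1 : List α) (a : α) (d : α) :
    (l1 ++ [a]).getD l1.length d = a := by
  rw [List.getD_eq_getElem _ _ (by simp)]
  exact List.getElem_concat_length rfl _

lemma ovRow_snoc_none (row : List Int) (ds : List (Option Int))
    (hle : ds.length + 1 ≤ row.length) :
    ovRow row (ds ++ [none]) = ovRow row ds := by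
  apply List.ext_getElem (by rw [ovRow_length, ovRow_length])
  intro j hjL hjR
  have hj : j < row.length := by rwa [ovRow_length] at hjL
  rw [← List.getD_eq_getElem _ 0 hjL, ← List.getD_eq_getElem _ 0 hjR,
      ovRow_getD row (ds ++ [none]) j hj (by simpa using hle),
      ovRow_getD row ds j hj (by omega)]
  by_cases hjd : j = ds.length
  · subst hjd
    rw [if_pos (by simp), getD_append_len, if_neg (by omega)]
    simp
  · by_cases hjlt : j < ds.length
    · rw [if_pos (by simp; omega), List.getD_append ds [none] none j hjlt, if_pos hjlt]
    · rw [if_neg (by simp; omega), if_neg hjlt]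

lemma ovRow_snoc_some (row : List Int) (ds : List (Option Int)) (v : Int)
    (hle : ds.length + 1 ≤ row.length) :
    ovRow row (ds ++ [some v])
      = PySem.List.pySetD (ovRow row ds) ((ds.length : Nat) : Int) v := by
  apply List.ext_getElem
    (by rw [ovRow_length, PySem.List.length_pySetD, ovRow_length])
  intro j hjL hjR
  have hj : j < row.length := by rwa [ovRow_length] at hjL
  rw [← List.getD_eq_getElem _ 0 hjL, ← List.getD_eq_getElem _ 0 hjR,
      ovRow_getD row (ds ++ [some v]) j hj (by simpa using hle),
      PySem.List.pySetD_of_nonneg _ _ (by omega)]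
  simp only [Int.toNat_natCast]
  rw [getD_set]
  by_cases hjd : j = ds.length
  · subst hjd
    rw [if_pos (by simp), getD_append_len,
        if_pos ⟨rfl, by rw [ovRow_length]; omega⟩]
    simp
  · rw [if_neg (show ¬(j = ds.length ∧ ds.length < (ovRow row ds).length) from
          fun hh => hjd hh.1),
        ovRow_getD row ds j hj (by omega)]
    by_cases hjlt : j < ds.length
    · rw [if_pos (show j < (ds ++ [some v]).length from by simp; omega),
          List.getD_append ds [some v] none j hjlt, if_pos hjlt]
    · rw [if_neg (show ¬ j < (ds ++ [some v]).length from by simp; omega), if_neg hjlt]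

lemma rowfold_eq {D : List (List (Option Int))} {r : Int} :
    ∀ (drow : List (Option Int)),
    (∀ j : Nat, j < drow.length → dAt D r (j : Int) = drow.getD j none) →
    ∀ (row : List Int), drow.length ≤ row.length →
    (PySem.List.pyRange 0 (drow.length : Int) 1).foldl
        (fun row c => match dAt D r c with
          | some v => PySem.List.pySetD row c v
          | none => row) row
      = ovRow row drow := by
  intro drow
  induction drow using List.reverseRecOn with
  | nil =>
    intro _ row _
    rw [show ((([] : List (Option Int)).length : Nat) : Int) = 0 by simp,
        PySem.List.pyRange_one_eq_nil (by omega)]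
    simp [ovRow]
  | append_singleton ds dv ih =>
    intro hread row hle
    have hlen1 : ds.length + 1 ≤ row.length := by simpa using hle
    rw [show (((ds ++ [dv]).length : Nat) : Int) = ((ds.length : Nat) : Int) + 1 by simp,
        PySem.List.pyRange_one_succ_right (by omega), List.foldl_append]
    rw [ih (fun j hj => by
          rw [hread j (by simp only [List.length_append, List.length_cons,
                List.length_nil]; omega),
              List.getD_append ds [dv] none j hj]) row (by omega)]
    simp only [List.foldl_cons, List.foldl_nil]
    rw [hread ds.length (by simp), getD_append_len]
    cases dv with
    | none => exact (ovRow_snoc_none row ds hlen1).symm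
    | some v => exact (ovRow_snoc_some row ds v hlen1).symm

lemma wb_eq {grid : List (List Int)} {R C : Int} {D : List (List (Option Int))}
    (hR0 : 0 ≤ R) (hC0 : 0 ≤ C) (hRg : R.toNat = grid.length)
    (hCg : ∀ row ∈ grid, C.toNat ≤ row.length) (hD : DimsD R C D) :
    writeBack grid R C D = ov grid D := by
  obtain ⟨hl, hrow⟩ := hD
  unfold writeBack
  have main : ∀ k : Nat, k ≤ R.toNat →
      (PySem.List.pyRange 0 ((k : Nat) : Int) 1).foldl
        (fun g r => (PySem.List.pyRange 0 C 1).foldl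
          (fun g c => match dAt D r c with | some v => setCell g r c v | none => g) g) grid
      = List.zipWith ovRow (grid.take k) (D.take k) ++ grid.drop k := by
    intro k
    induction k with
    | zero =>
      intro _
      have h0 : PySem.List.pyRange 0 (((0 : Nat) : Nat) : Int) 1 = [] :=
        PySem.List.pyRange_one_eq_nil (by omega)
      rw [h0]
      simp
    | succ k ihk =>
      intro hk1
      have hk : k ≤ R.toNat := by omega
      have hkg : k < grid.length := by omega
      have hkD : k < D.length := by omega
      rw [show (((k + 1 : Nat) : Nat) : Int) = ((k : Nat) : Int) + 1 by push_cast; ring,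
          PySem.List.pyRange_one_succ_right (by omega), List.foldl_append, ihk hk]
      simp only [List.foldl_cons, List.foldl_nil]
      have hGpre : (List.zipWith ovRow (grid.take k) (D.take k)).length = k := by
        simp only [List.length_zipWith, List.length_take]
        omega
      have hGlen : (List.zipWith ovRow (grid.take k) (D.take k) ++ grid.drop k).length
          = grid.length := by
        simp only [List.length_append, List.length_drop, hGpre]
        omega
      have hrowk : PySem.List.pyGetD
          (List.zipWith ovRow (grid.take k) (D.take k) ++ grid.drop k) ((k : Nat) : Int) []
          = grid[k] := by
        rw [pyGetD_nonneg _ _ (by omega)]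
        simp only [Int.toNat_natCast]
        rw [List.getD_eq_getElem _ _ (by rw [hGlen]; exact hkg),
            List.getElem_append_right (by omega)]
        simp only [hGpre, List.getElem_drop]
        congr 1
        omega
      have hdlen : (D[k]).length = C.toNat := hrow _ (List.getElem_mem hkD)
      have hread : ∀ j : Nat, j < (D[k]).length →
          dAt D ((k : Nat) : Int) (j : Int) = (D[k]).getD j none := by
        intro j hj
        rw [dAt_nonneg _ _ _ (by omega) (by omega)]
        simp only [Int.toNat_natCast]
        rw [List.getD_eq_getElem D [] hkD]
      have hrowfold := rowfold_eq (D := D) (r := ((k : Nat) : Int)) (D[k]) hread (grid[k])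
        (by rw [hdlen]; exact hCg _ (List.getElem_mem hkg))
      rw [show (((D[k]).length : Nat) : Int) = C from by rw [hdlen]; omega] at hrowfold
      have hinner := wbInner (D := D) ((k : Nat) : Int) (by omega)
        (PySem.List.pyRange 0 C 1)
        (fun c hc => ((PySem.List.mem_pyRange_one).mp hc).1)
        (List.zipWith ovRow (grid.take k) (D.take k) ++ grid.drop k)
        (by rw [hGlen]; simpa using hkg)
      rw [hinner, hrowk, hrowfold,
          PySem.List.pySetD_of_nonneg _ _ (by omega)]
      simp only [Int.toNat_natCast]
      rw [set_append_len' _ _ k hGpre, List.drop_eq_getElem_cons hkg,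
          List.set_cons_zero,
          List.take_succ_eq_append_getElem hkg, List.take_succ_eq_append_getElem hkD,
          List.zipWith_append (by simp only [List.length_take]; omega)]
      simp
  have hfin := main R.toNat le_rfl
  rw [show ((R.toNat : Nat) : Int) = R by omega] at hfin
  rw [hfin]
  unfold ov
  rw [show grid.take R.toNat = grid from by rw [hRg]; exact List.take_length,
      show D.take R.toNat = D from by rw [← hl]; exact List.take_length,
      show grid.drop R.toNat = [] from by rw [hRg]; exact List.drop_length,
      show grid.drop D.length = [] from by rw [hl, hRg]; exact List.drop_length]

-- ---- the initial states coincide ----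

lemma init_inv {grid : List (List Int)} (hPre : Pre_wag grid) :
    BfsInv grid (PySem.List.len grid) (PySem.List.len (PySem.List.pyGetD grid 0 []))
      (initDist grid (PySem.List.len grid) (PySem.List.len (PySem.List.pyGetD grid 0 [])))
      grid (PySem.Set.ofList (getGates grid)) (getGates grid) 0 := by
  have hRg : (PySem.List.len grid).toNat = grid.length := by
    simp [PySem.List.len_eq]
  have hCg : ∀ row ∈ grid, (PySem.List.len (PySem.List.pyGetD grid 0 [])).toNat ≤ row.length := by
    intro row h
    have := hPre.2 row h
    simp only [PySem.List.len_eq, Int.toNat_natCast]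
    exact this
  refine ⟨dims_initDist _ _ _, (ov_initDist hRg hCg).symm, ?_, ?_, ?_⟩
  · intro p hp
    rw [PySem.Set.contains_iff, PySem.Set.mem_ofList, mem_getGates,
        show dAt (initDist grid (PySem.List.len grid)
            (PySem.List.len (PySem.List.pyGetD grid 0 []))) p.1 p.2
          = if cellAt grid p.1 p.2 = 0 then some 0 else none from by
          cases p; exact dAt_initDist grid hp]
    by_cases hz : cellAt grid p.1 p.2 = 0
    · rw [if_pos hz]
      constructor
      · intro _; simp
      · intro _; exact ⟨hp, hz⟩
    · simp [hz]
  · intro p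
    rw [mem_getGates]
    constructor
    · rintro ⟨hInb, hz⟩
      refine ⟨hInb, ?_⟩
      rw [show dAt (initDist grid (PySem.List.len grid)
            (PySem.List.len (PySem.List.pyGetD grid 0 []))) p.1 p.2
          = if cellAt grid p.1 p.2 = 0 then some 0 else none from by
          cases p; exact dAt_initDist grid hInb, if_pos hz]
    · rintro ⟨hInb, hsome⟩
      refine ⟨hInb, ?_⟩
      rw [show dAt (initDist grid (PySem.List.len grid)
            (PySem.List.len (PySem.List.pyGetD grid 0 []))) p.1 p.2
          = if cellAt grid p.1 p.2 = 0 then some 0 else none from by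
          cases p; exact dAt_initDist grid hInb] at hsome
      by_cases hz : cellAt grid p.1 p.2 = 0
      · exact hz
      · rw [if_neg hz] at hsome
        cases hsome
  · intro p v hp hsome
    rw [show dAt (initDist grid (PySem.List.len grid)
          (PySem.List.len (PySem.List.pyGetD grid 0 []))) p.1 p.2
        = if cellAt grid p.1 p.2 = 0 then some 0 else none from by
        cases p; exact dAt_initDist grid hp] at hsome
    by_cases hz : cellAt grid p.1 p.2 = 0
    · rw [if_pos hz] at hsome
      cases hsome
      omega
    · rw [if_neg hz] at hsome
      cases hsome

lemma level_eq_pull (grid : List (List Int)) (hPre : Pre_wag grid) :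
    wagLevel grid = wag_alt grid := by
  have hRg : (PySem.List.len grid).toNat = grid.length := by
    simp [PySem.List.len_eq]
  have hR0 : 0 ≤ PySem.List.len grid := by
    rw [PySem.List.len_eq]; exact Int.natCast_nonneg _
  have hC0 : 0 ≤ PySem.List.len (PySem.List.pyGetD grid 0 []) := by
    rw [PySem.List.len_eq]; exact Int.natCast_nonneg _
  have hCg : ∀ row ∈ grid, (PySem.List.len (PySem.List.pyGetD grid 0 [])).toNat ≤ row.length := by
    intro row h
    have := hPre.2 row h
    simp only [PySem.List.len_eq, Int.toNat_natCast]
    exact this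
  obtain ⟨sl, sd⟩ := syncLoop hRg hCg
    (grid.length * (PySem.List.pyGetD grid 0 []).length + 2)
    (initDist grid (PySem.List.len grid) (PySem.List.len (PySem.List.pyGetD grid 0 [])))
    grid (PySem.Set.ofList (getGates grid)) (getGates grid) 0 (init_inv hPre)
  simp only [wagLevel, wag_alt]
  rw [initEq grid]
  rw [show ((getGates grid, PySem.Set.ofList (getGates grid)) :
        List (Int × Int) × PySem.Set (Int × Int)).2 = PySem.Set.ofList (getGates grid) from rfl,
      show ((getGates grid, PySem.Set.ofList (getGates grid)) :
        List (Int × Int) × PySem.Set (Int × Int)).1 = getGates grid from rfl]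
  rw [sl]
  exact (wb_eq hR0 hC0 hRg hCg sd).symm

-- ===== VERDICT (by name: the statement is the Claim_ definition above) =====
theorem wag_spec : Claim_equal_wag := by
  intro grid _ hPre
  unfold Spec_wag
  rw [wag_eq_level, level_eq_pull grid hPre]
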